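-- pv_equiv track=rewrite | github.com/haolunc/ARC-RL | reference_solutions/solutions/ac6f9922.py | transform
-- ===== SOURCE A (Python) =====
-- def transform(grid):
--
--     h = len(grid)
--     w = len(grid[0])
--
--     border_color = grid[0][0]
--
--     from collections import Counter, deque
--
--     interior_counts = Counter()
--     for i in range(1, h-1):
--         for j in range(1, w-1):
--             c = grid[i][j]
--             if c != border_color:
--                 interior_counts[c] += 1
--
--     if interior_counts:
--         background_color = interior_counts.most_common(1)[0][0]
--     else:
--         background_color = border_color
--
--     visited = [[False]*w for _ in range(h)]
--     components = []
--
--     for i in range(1, h-1):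
--         for j in range(1, w-1):
--             if visited[i][j]:
--                 continue
--             colour = grid[i][j]
--             if colour == border_color or colour == background_color:
--                 continue
--
--             q = deque()
--             q.append((i, j))
--             visited[i][j] = True
--             min_r, min_c = i, j
--             while q:
--                 r, c = q.popleft()
--
--                 if r < min_r: min_r = r
--                 if c < min_c: min_c = c
--
--                 for dr, dc in ((1,0),(-1,0),(0,1),(0,-1)):
--                     nr, nc = r+dr, c+dc
--                     if 0 <= nr < h and 0 <= nc < w and not visited[nr][nc]:
--                         if grid[nr][nc] == colour:
--                             visited[nr][nc] = True
--                             q.append((nr, nc))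
--             components.append((min_r, min_c, colour))
--
--     rows_set = sorted({r for r, _, _ in components})
--     cols_set = sorted({c for _, c, _ in components})
--
--     out_rows = max(2, len(rows_set))
--     out_cols = max(2, len(cols_set))
--
--     row_index = {r: idx for idx, r in enumerate(rows_set)}
--     col_index = {c: idx for idx, c in enumerate(cols_set)}
--
--     out_grid = [[border_color for _ in range(out_cols)] for _ in range(out_rows)]
--
--     for r, c, col in components:
--         ri = row_index[r]
--         ci = col_index[c]
--         out_grid[ri][ci] = col
--
--     return out_grid
-- ===== SOURCE B (Python) =====
-- def transform(grid):
--
--     h = len(grid)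
--     w = len(grid[0])
--
--     border_color = grid[0][0]
--
--     from collections import Counter
--
--     interior_counts = Counter()
--     for i in range(1, h-1):
--         for j in range(1, w-1):
--             c = grid[i][j]
--             if c != border_color:
--                 interior_counts[c] += 1
--
--     if interior_counts:
--         background_color = interior_counts.most_common(1)[0][0]
--     else:
--         background_color = border_color
--
--     # Connected components by label propagation instead of search: every active
--     # cell starts labelled by itself; each round every cell takes the lexicographic
--     # minimum of its own and its same-coloured neighbours' labels, until a fixpoint.
--     # The final label of a cell is its component's lexicographically smallest cell.
--     colour_of = {}
--     for i in range(h):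
--         for j, c in enumerate(grid[i][:w]):
--             if c != border_color and c != background_color:
--                 colour_of[(i, j)] = c
--
--     label = {p: p for p in colour_of}
--     for _ in range(len(label)):
--         new = {
--             (i, j): min([label[(i, j)]] +
--                         [label[q] for q in ((i-1, j), (i+1, j), (i, j-1), (i, j+1))
--                          if q in label and colour_of[q] == colour_of[(i, j)]])
--             for (i, j) in label}
--         if new == label:
--             break
--         label = new
--
--     components = []
--     seen_roots = set()
--     for i in range(1, h-1):
--         for j in range(1, w-1):
--             if (i, j) in label and label[(i, j)] not in seen_roots:
--                 root = label[(i, j)]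
--                 seen_roots.add(root)
--                 cells = [p for p in label if label[p] == root]
--                 components.append((min(r for r, _ in cells),
--                                    min(c for _, c in cells),
--                                    colour_of[(i, j)]))
--
--     rows_set = sorted({r for r, _, _ in components})
--     cols_set = sorted({c for _, c, _ in components})
--
--     out_rows = max(2, len(rows_set))
--     out_cols = max(2, len(cols_set))
--
--     row_index = {r: idx for idx, r in enumerate(rows_set)}
--     col_index = {c: idx for idx, c in enumerate(cols_set)}
--
--     out_grid = [[border_color for _ in range(out_cols)] for _ in range(out_rows)]
--
--     for r, c, col in components:
--         ri = row_index[r]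
--         ci = col_index[c]
--         out_grid[ri][ci] = col
--
--     return out_grid
-- ===== Notes on version B (the rewrite author's own statement) =====
-- stated objective: alternative
-- what changed: Connected components are computed by iterated label propagation to a fixpoint (every active cell starts as its own label and repeatedly takes the lexicographic minimum of its own and its same-coloured neighbours' labels, so a component's cells all converge to its lexicographically smallest cell) instead of A's seed-by-seed BFS flood fill with a visited matrix; components are then emitted by scanning interior cells and aggregating the cells of each newly seen root label, while the background-colour count and the output-grid assembly stay as in A.
-- outside the precondition, e.g. on transform([[2, 2, 3], [1, 2, 3], [1]]): A returns [[2, 2], [2, 2]], B returns [[2, 2], [2, 2]]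
import Mathlib
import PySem

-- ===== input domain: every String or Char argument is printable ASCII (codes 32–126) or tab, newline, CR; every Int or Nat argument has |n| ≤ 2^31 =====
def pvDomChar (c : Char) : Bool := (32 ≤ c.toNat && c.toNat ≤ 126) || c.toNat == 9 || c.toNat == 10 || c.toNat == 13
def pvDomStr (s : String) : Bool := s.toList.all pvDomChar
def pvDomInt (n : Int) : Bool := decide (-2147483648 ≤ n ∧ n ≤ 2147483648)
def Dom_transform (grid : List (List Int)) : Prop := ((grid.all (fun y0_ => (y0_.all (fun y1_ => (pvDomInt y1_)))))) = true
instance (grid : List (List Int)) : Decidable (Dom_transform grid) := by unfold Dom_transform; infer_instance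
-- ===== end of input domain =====

-- B finds the connected components by label propagation to a fixpoint (each active cell
-- repeatedly takes the lexicographic minimum of its own and its same-coloured neighbours'
-- labels) instead of A's seed-by-seed BFS flood fill; background counting and the output
-- assembly are unchanged (objective: alternative).

-- grid[i][j]; exact for the in-range accesses both programs make under Pre_transform
def pvAt (grid : List (List Int)) (i j : Int) : Int :=
  PySem.List.pyGetD (PySem.List.pyGetD grid i []) j 0

-- the in-bounds cell rectangle and the termination measure of A's flood-fill loop
def pvBox (h w : Int) : Finset (Int × Int) :=
  ((PySem.List.pyRange 0 h 1).flatMap (fun i => (PySem.List.pyRange 0 w 1).map (fun j => (i, j)))).toFinset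

theorem mem_pvBox (h w : Int) (x : Int × Int) :
    x ∈ pvBox h w ↔ 0 ≤ x.1 ∧ x.1 < h ∧ 0 ≤ x.2 ∧ x.2 < w := by
  obtain ⟨a, b⟩ := x
  simp only [pvBox, List.mem_toFinset, List.mem_flatMap, List.mem_map,
    PySem.List.mem_pyRange_one, Prod.mk.injEq]
  constructor
  · rintro ⟨i, ⟨hi1, hi2⟩, j, ⟨hj1, hj2⟩, rfl, rfl⟩; exact ⟨hi1, hi2, hj1, hj2⟩
  · rintro ⟨h1, h2, h3, h4⟩; exact ⟨a, ⟨h1, h2⟩, b, ⟨⟨h3, h4⟩, rfl, rfl⟩⟩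

def pvMu (h w : Int) (vis : Finset (Int × Int)) (q : List (Int × Int)) : Nat :=
  2 * ((pvBox h w) \ vis).card + q.length

-- ===== PORT A =====

def pvDirs : List (Int × Int) := [(1, 0), (-1, 0), (0, 1), (0, -1)]

-- one neighbour test of A's BFS inner 'for dr, dc in …' loop
def stepA (grid : List (List Int)) (h w colour r c : Int)
    (vq : Finset (Int × Int) × List (Int × Int)) (d : Int × Int) :
    Finset (Int × Int) × List (Int × Int) :=
  if (0 ≤ r + d.1 ∧ r + d.1 < h) ∧ (0 ≤ c + d.2 ∧ c + d.2 < w) ∧ (r + d.1, c + d.2) ∉ vq.1 then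
    if pvAt grid (r + d.1) (c + d.2) = colour then
      (insert (r + d.1, c + d.2) vq.1, vq.2 ++ [(r + d.1, c + d.2)])
    else vq
  else vq

theorem pvMu_stepA_le (grid : List (List Int)) (h w colour r c : Int)
    (vq : Finset (Int × Int) × List (Int × Int)) (d : Int × Int) :
    pvMu h w (stepA grid h w colour r c vq d).1 (stepA grid h w colour r c vq d).2 ≤
      pvMu h w vq.1 vq.2 := by
  unfold stepA
  split
  · next hb =>
    split
    · have hmem : (r + d.1, c + d.2) ∈ pvBox h w \ vq.1 := by
        rw [Finset.mem_sdiff, mem_pvBox]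
        exact ⟨⟨hb.1.1, hb.1.2, hb.2.1.1, hb.2.1.2⟩, hb.2.2⟩
      have hcard : (pvBox h w \ insert (r + d.1, c + d.2) vq.1).card =
          (pvBox h w \ vq.1).card - 1 := by
        rw [Finset.sdiff_insert]
        rw [Finset.card_erase_of_mem hmem]
      have hpos : 1 ≤ (pvBox h w \ vq.1).card := Finset.card_pos.mpr ⟨_, hmem⟩
      simp only [pvMu, hcard, List.length_append, List.length_cons, List.length_nil]
      omega
    · exact le_refl _
  · exact le_refl _

theorem pvMu_foldl_stepA_le (grid : List (List Int)) (h w colour r c : Int)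
    (l : List (Int × Int)) (s : Finset (Int × Int) × List (Int × Int)) :
    pvMu h w (l.foldl (stepA grid h w colour r c) s).1
        (l.foldl (stepA grid h w colour r c) s).2 ≤ pvMu h w s.1 s.2 := by
  induction l generalizing s with
  | nil => exact le_refl _
  | cons d l ih =>
    exact (ih _).trans (pvMu_stepA_le grid h w colour r c s d)

-- A's BFS while-loop: state (visited, queue, min_r, min_c), pops the queue FRONT
def floodA (grid : List (List Int)) (h w colour : Int) (vis : Finset (Int × Int))
    (q : List (Int × Int)) (mr mc : Int) : Finset (Int × Int) × Int × Int :=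
  match q with
  | [] => (vis, mr, mc)
  | (r, c) :: qs =>
    let mr' := if r < mr then r else mr
    let mc' := if c < mc then c else mc
    let s := pvDirs.foldl (stepA grid h w colour r c) (vis, qs)
    floodA grid h w colour s.1 s.2 mr' mc'
termination_by pvMu h w vis q
decreasing_by
  calc pvMu h w s.1 s.2 ≤ pvMu h w vis qs := pvMu_foldl_stepA_le grid h w colour r c pvDirs (vis, qs)
    _ < pvMu h w vis ((r, c) :: qs) := by simp [pvMu]

-- A's body of the component scan at interior cell (i, j) ('continue' = identity)
def compStepA (grid : List (List Int)) (h w bc bg : Int)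
    (s : Finset (Int × Int) × List (Int × Int × Int)) (i j : Int) :
    Finset (Int × Int) × List (Int × Int × Int) :=
  if (i, j) ∈ s.1 then s
  else
    let colour := pvAt grid i j
    if colour = bc ∨ colour = bg then s
    else
      let r := floodA grid h w colour (insert (i, j) s.1) [(i, j)] i j
      (r.1, s.2 ++ [(r.2.1, r.2.2, colour)])

-- A's interior component scan (double for-loop)
def pvScanA (grid : List (List Int)) (h w bc bg : Int) :
    Finset (Int × Int) × List (Int × Int × Int) :=
  (PySem.List.pyRange 1 (h - 1) 1).foldl (fun s i =>
    (PySem.List.pyRange 1 (w - 1) 1).foldl (fun s j => compStepA grid h w bc bg s i j) s)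
    (∅, [])

-- the background colour: Counter over interior non-border cells, then most_common(1)[0][0];
-- the [0] is guarded by 'if interior_counts', so headD's default is never returned.
-- This code is IDENTICAL in A and B (B keeps A's Counter pass), so both ports share it.
def pvBg (grid : List (List Int)) (h w bc : Int) : Int :=
  let counts := (PySem.List.pyRange 1 (h - 1) 1).foldl (fun d i =>
      (PySem.List.pyRange 1 (w - 1) 1).foldl (fun d j =>
        let c := pvAt grid i j
        if c ≠ bc then d.modify c 0 (· + 1) else d) d) PySem.Dict.empty
  if counts.size ≠ 0 then
    ((PySem.List.sorted counts.items (fun p => p.2) true).headD (0, 0)).1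
  else bc

-- rows_set/cols_set ranks and the mutated out_grid; identical in A and B, so shared.
-- row_index[r]/col_index[c] are present (getD default unread) and in range (pySetD exact).
def pvAssemble (comps : List (Int × Int × Int)) (bc : Int) : List (List Int) :=
  let rows := PySem.List.sorted (PySem.Set.ofList (comps.map (fun t => t.1))) (fun x => x) false
  let cols := PySem.List.sorted (PySem.Set.ofList (comps.map (fun t => t.2.1))) (fun x => x) false
  let outRows : Int := max 2 (rows.length : Int)
  let outCols : Int := max 2 (cols.length : Int)
  let rowIndex := (PySem.List.enumerate rows 0).foldl (fun d p => d.insert p.2 p.1) PySem.Dict.empty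
  let colIndex := (PySem.List.enumerate cols 0).foldl (fun d p => d.insert p.2 p.1) PySem.Dict.empty
  let g0 := (PySem.List.pyRange 0 outRows 1).map (fun _ =>
      (PySem.List.pyRange 0 outCols 1).map (fun _ => bc))
  comps.foldl (fun g t =>
      let ri := rowIndex.getD t.1 0
      let ci := colIndex.getD t.2.1 0
      PySem.List.pySetD g ri (PySem.List.pySetD (PySem.List.pyGetD g ri []) ci t.2.2)) g0

def transform (grid : List (List Int)) : List (List Int) :=
  let h : Int := grid.length
  let w : Int := (PySem.List.pyGetD grid 0 []).length
  let bc := pvAt grid 0 0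
  let bg := pvBg grid h w bc
  pvAssemble (pvScanA grid h w bc bg).2 bc

-- ===== PORT B =====

-- neighbour order of B's tuple ((i-1,j),(i+1,j),(i,j-1),(i,j+1))
def pvNbrs4 (p : Int × Int) : List (Int × Int) :=
  [(p.1 - 1, p.2), (p.1 + 1, p.2), (p.1, p.2 - 1), (p.1, p.2 + 1)]

-- Python's running min over tuples: keep the accumulator on ties, lexicographic '<'
def pvLexMin (a b : Int × Int) : Int × Int :=
  if b.1 < a.1 ∨ (b.1 = a.1 ∧ b.2 < a.2) then b else a

-- colour_of: every in-grid cell (sliced row, so exact also on ragged rows) whose colour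
-- is neither border nor background
def pvColourOf (grid : List (List Int)) (h w bc bg : Int) : PySem.Dict (Int × Int) Int :=
  (PySem.List.pyRange 0 h 1).foldl (fun d i =>
    (PySem.List.enumerate (PySem.List.slice (PySem.List.pyGetD grid i []) none (some w)) 0).foldl
      (fun d p => if p.2 ≠ bc ∧ p.2 ≠ bg then d.insert (i, p.1) p.2 else d) d)
    PySem.Dict.empty

-- the list [label[q] for q in nbrs if q in label and colour_of[q] == colour_of[p]]
def pvCands (co : PySem.Dict (Int × Int) Int) (lab : PySem.Dict (Int × Int) (Int × Int))
    (p : Int × Int) : List (Int × Int) :=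
  (pvNbrs4 p).flatMap (fun q =>
    match lab.get? q with
    | some lv => if co.getD q 0 = co.getD p 0 then [lv] else []
    | none => [])

-- one synchronous propagation round (the dict comprehension)
def pvRound (co : PySem.Dict (Int × Int) Int) (lab : PySem.Dict (Int × Int) (Int × Int)) :
    PySem.Dict (Int × Int) (Int × Int) :=
  lab.items.foldl (fun d pv =>
    d.insert pv.1 ((pvCands co lab pv.1).foldl pvLexMin pv.2)) PySem.Dict.empty

-- B's body of the component scan at interior cell (i, j); the min() calls are over the
-- nonempty cell list of the root's component, so min?'s none branch is never taken
def pvCompStepB (co : PySem.Dict (Int × Int) Int) (labF : PySem.Dict (Int × Int) (Int × Int))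
    (s : PySem.Set (Int × Int) × List (Int × Int × Int)) (i j : Int) :
    PySem.Set (Int × Int) × List (Int × Int × Int) :=
  match labF.get? (i, j) with
  | none => s
  | some root =>
    if PySem.Set.contains s.1 root then s
    else
      let cells := (labF.items.filter (fun pv => decide (pv.2 = root))).map (fun pv => pv.1)
      let mr := match PySem.List.min? (cells.map (fun p => p.1)) (fun x => x) with
                | some m => m | none => 0
      let mc := match PySem.List.min? (cells.map (fun p => p.2)) (fun x => x) with
                | some m => m | none => 0
      (PySem.Set.add s.1 root, s.2 ++ [(mr, mc, co.getD (i, j) 0)])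

def pvScanB (co : PySem.Dict (Int × Int) Int) (labF : PySem.Dict (Int × Int) (Int × Int))
    (h w : Int) : PySem.Set (Int × Int) × List (Int × Int × Int) :=
  (PySem.List.pyRange 1 (h - 1) 1).foldl (fun s i =>
    (PySem.List.pyRange 1 (w - 1) 1).foldl (fun s j => pvCompStepB co labF s i j) s)
    (PySem.Set.empty, [])

def transform_alt (grid : List (List Int)) : List (List Int) :=
  let h : Int := grid.length
  let w : Int := (PySem.List.pyGetD grid 0 []).length
  let bc := pvAt grid 0 0
  let bg := pvBg grid h w bc
  let co := pvColourOf grid h w bc bg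
  let lab0 := co.keys.foldl (fun d p => d.insert p p) PySem.Dict.empty
  -- 'for _ in range(len(label))' with the early 'break' at a fixpoint carried as a flag
  let labF := ((PySem.List.pyRange 0 (lab0.size) 1).foldl (fun s _ =>
      if s.2 then s else
        let nw := pvRound co s.1
        if nw = s.1 then (s.1, true) else (nw, false)) (lab0, false)).1
  pvAssemble (pvScanB co labF h w).2 bc

-- ===== PRECONDITION & SPEC =====
-- Pre_ excludes inputs where A raises IndexError (empty grid or empty first row) and the
-- ragged grids with a real interior whose later rows are shorter than the first, where
-- A's behaviour is an accident of partial indexing (it may raise IndexError mid-scan).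
def Pre_transform (grid : List (List Int)) : Prop :=
  grid ≠ [] ∧ (grid.headD []) ≠ [] ∧
    (grid.length ≤ 2 ∨ (grid.headD []).length ≤ 2 ∨
      ∀ row ∈ grid, (grid.headD []).length ≤ row.length)
instance (grid : List (List Int)) : Decidable (Pre_transform grid) := by
  unfold Pre_transform; infer_instance

def pvWitness_transform : List (List Int) :=
  [[0, 0, 0, 0, 0], [0, 1, 1, 2, 0], [0, 1, 1, 3, 0], [0, 0, 0, 0, 0]]

def Spec_transform (grid : List (List Int)) (out : List (List Int)) : Prop := out = transform_alt grid
instance (grid : List (List Int)) (out : List (List Int)) : Decidable (Spec_transform grid out) := by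
  unfold Spec_transform; infer_instance

-- ===== CLAIM (what is proved, stated in full; the proofs are below) =====
def Claim_equal_transform : Prop := ∀ (grid : List (List Int)), Dom_transform grid → Pre_transform grid → Spec_transform grid (transform grid)

-- ===== LEMMAS AND PROOFS =====

-- Python's tuple '<=' on int pairs
def pvLexLe (a b : Int × Int) : Prop :=
  a.1 < b.1 ∨ (a.1 = b.1 ∧ a.2 ≤ b.2)

theorem pvLexLe_refl (a : Int × Int) : pvLexLe a a := by unfold pvLexLe; omega

theorem pvLexLe_trans {a b c : Int × Int} (h1 : pvLexLe a b) (h2 : pvLexLe b c) : pvLexLe a c := by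
  unfold pvLexLe at *; omega

theorem pvLexLe_antisymm {a b : Int × Int} (h1 : pvLexLe a b) (h2 : pvLexLe b a) : a = b := by
  unfold pvLexLe at *
  obtain ⟨x, y⟩ := a; obtain ⟨u, v⟩ := b
  simp only [Prod.mk.injEq]
  constructor <;> omega

theorem pvLexMin_le_left (a b : Int × Int) : pvLexLe (pvLexMin a b) a := by
  unfold pvLexMin pvLexLe; split <;> omega

theorem pvLexMin_le_right (a b : Int × Int) : pvLexLe (pvLexMin a b) b := by
  unfold pvLexMin pvLexLe; split <;> omega

theorem pvLexMin_cases (a b : Int × Int) : pvLexMin a b = a ∨ pvLexMin a b = b := by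
  unfold pvLexMin; split <;> simp

theorem foldl_pvLexMin_le (l : List (Int × Int)) (a : Int × Int) :
    pvLexLe (l.foldl pvLexMin a) a ∧ ∀ x ∈ l, pvLexLe (l.foldl pvLexMin a) x := by
  induction l generalizing a with
  | nil => exact ⟨pvLexLe_refl a, by simp⟩
  | cons b l ih =>
    obtain ⟨h1, h2⟩ := ih (pvLexMin a b)
    refine ⟨pvLexLe_trans h1 (pvLexMin_le_left a b), ?_⟩
    intro x hx
    rcases List.mem_cons.mp hx with rfl | hx'
    · exact pvLexLe_trans h1 (pvLexMin_le_right a x)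
    · exact h2 x hx'

theorem foldl_pvLexMin_mem (l : List (Int × Int)) (a : Int × Int) :
    l.foldl pvLexMin a = a ∨ l.foldl pvLexMin a ∈ l := by
  induction l generalizing a with
  | nil => exact Or.inl rfl
  | cons b l ih =>
    rcases ih (pvLexMin a b) with h | h
    · rcases pvLexMin_cases a b with h' | h'
      · exact Or.inl (by rw [List.foldl_cons, h, h'])
      · exact Or.inr (by rw [List.foldl_cons, h, h']; exact List.mem_cons_self)
    · exact Or.inr (List.mem_cons_of_mem _ h)

-- membership in the four-neighbour list is symmetric
theorem mem_pvNbrs4_symm {p q : Int × Int} (h : q ∈ pvNbrs4 p) : p ∈ pvNbrs4 q := by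
  obtain ⟨a, b⟩ := p; obtain ⟨c, d⟩ := q
  simp only [pvNbrs4, List.mem_cons, List.not_mem_nil, or_false, Prod.mk.injEq] at h ⊢
  omega

theorem not_mem_pvNbrs4_self (p : Int × Int) : p ∉ pvNbrs4 p := by
  obtain ⟨a, b⟩ := p
  simp only [pvNbrs4, List.mem_cons, List.not_mem_nil, or_false, Prod.mk.injEq]
  omega

-- the same-colour adjacency of active cells B's propagation works on
def pvRadjD (co : PySem.Dict (Int × Int) Int) (p q : Int × Int) : Prop :=
  co.contains p = true ∧ co.contains q = true ∧ co.getD q 0 = co.getD p 0 ∧ q ∈ pvNbrs4 p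

theorem pvRadjD_symm {co : PySem.Dict (Int × Int) Int} {p q : Int × Int}
    (h : pvRadjD co p q) : pvRadjD co q p :=
  ⟨h.2.1, h.1, h.2.2.1.symm, mem_pvNbrs4_symm h.2.2.2⟩

def pvGraphD (co : PySem.Dict (Int × Int) Int) : SimpleGraph (Int × Int) where
  Adj := pvRadjD co
  symm := fun _ _ h => pvRadjD_symm h
  loopless := by
    constructor
    intro p h
    exact not_mem_pvNbrs4_self p h.2.2.2

-- q is within n propagation steps of p (peeling at the p side)
def pvReachN (co : PySem.Dict (Int × Int) Int) : Nat → (Int × Int) → (Int × Int) → Prop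
  | 0, q, p => q = p
  | n + 1, q, p => pvReachN co n q p ∨ ∃ r, pvRadjD co r p ∧ pvReachN co n q r

theorem pvReachN_mono {co : PySem.Dict (Int × Int) Int} {n : Nat} {q p : Int × Int}
    (h : pvReachN co n q p) : pvReachN co (n + 1) q p := Or.inl h

theorem pvReachN_mono_le {co : PySem.Dict (Int × Int) Int} {m n : Nat} {q p : Int × Int}
    (hmn : m ≤ n) (h : pvReachN co m q p) : pvReachN co n q p := by
  induction n with
  | zero => exact (Nat.le_zero.mp hmn) ▸ h
  | succ n ih =>
    rcases Nat.lt_or_ge m (n + 1) with hlt | hge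
    · exact pvReachN_mono (ih (Nat.lt_succ_iff.mp hlt))
    · exact (Nat.le_antisymm hmn hge) ▸ h

theorem pvReachN_head {co : PySem.Dict (Int × Int) Int} {n : Nat} {x r p : Int × Int}
    (hadj : pvRadjD co x r) (h : pvReachN co n r p) : pvReachN co (n + 1) x p := by
  induction n generalizing p with
  | zero =>
    cases h
    exact Or.inr ⟨x, hadj, rfl⟩
  | succ n ih =>
    rcases h with h' | ⟨s, hs, h'⟩
    · exact pvReachN_mono (ih h')
    · exact Or.inr ⟨s, hs, ih h'⟩

theorem pvReachN_to_rtg {co : PySem.Dict (Int × Int) Int} {n : Nat} {q p : Int × Int}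
    (h : pvReachN co n q p) : Relation.ReflTransGen (pvRadjD co) q p := by
  induction n generalizing p with
  | zero => exact h ▸ Relation.ReflTransGen.refl
  | succ n ih =>
    rcases h with h' | ⟨r, hr, h'⟩
    · exact ih h'
    · exact (ih h').tail hr

theorem pv_walk_to_reachN {co : PySem.Dict (Int × Int) Int} {q p : Int × Int}
    (wk : (pvGraphD co).Walk q p) : pvReachN co wk.length q p := by
  induction wk with
  | nil => rfl
  | cons hadj wk' ih => exact pvReachN_head hadj ih

theorem pv_walk_support_contains {co : PySem.Dict (Int × Int) Int} {q p : Int × Int}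
    (wk : (pvGraphD co).Walk q p) (hq : co.contains q = true) :
    ∀ v ∈ wk.support, co.contains v = true := by
  induction wk with
  | nil =>
    intro v hv
    simp only [SimpleGraph.Walk.support_nil, List.mem_singleton] at hv
    exact hv ▸ hq
  | cons hadj wk' ih =>
    intro v hv
    rw [SimpleGraph.Walk.support_cons] at hv
    rcases List.mem_cons.mp hv with rfl | hv'
    · exact hq
    · exact ih hadj.2.1 v hv'

-- every cell connected to p is within keys-many propagation steps of p
theorem pvReach_shortcut {co : PySem.Dict (Int × Int) Int} {q p : Int × Int}
    (hq : co.contains q = true)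
    (h : Relation.ReflTransGen (pvRadjD co) q p) : pvReachN co co.keys.length q p := by
  have hreach : (pvGraphD co).Reachable q p := by
    induction h with
    | refl => exact SimpleGraph.Reachable.refl _
    | tail _ hadj ih => exact ih.trans (SimpleGraph.Adj.reachable (G := pvGraphD co) hadj)
  obtain ⟨wk0⟩ := hreach
  have hpath := wk0.bypass_isPath
  have hsub : wk0.bypass.support ⊆ co.keys := by
    intro v hv
    exact (PySem.Dict.contains_iff_mem_keys _ _).mp (pv_walk_support_contains wk0.bypass hq v hv)
  have hnodup := hpath.support_nodup
  have hlen : wk0.bypass.support.length ≤ co.keys.length :=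
    (List.subperm_of_subset hnodup hsub).length_le
  have hlens := SimpleGraph.Walk.length_support wk0.bypass
  exact pvReachN_mono_le (by omega) (pv_walk_to_reachN wk0.bypass)

-- the abstract one-round update of the label function
def pvStepF (co : PySem.Dict (Int × Int) Int) (g : Int × Int → Int × Int) (p : Int × Int) :
    Int × Int :=
  ((pvNbrs4 p).flatMap (fun q =>
    if co.contains q = true ∧ co.getD q 0 = co.getD p 0 then [g q] else [])).foldl
    pvLexMin (g p)

def pvF (co : PySem.Dict (Int × Int) Int) : Nat → (Int × Int) → (Int × Int)
  | 0 => fun p => p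
  | k + 1 => pvStepF co (pvF co k)

theorem pvStepF_le (co : PySem.Dict (Int × Int) Int) (g : Int × Int → Int × Int) (p : Int × Int) :
    pvLexLe (pvStepF co g p) (g p) :=
  (foldl_pvLexMin_le _ _).1

theorem pvStepF_le_cand {co : PySem.Dict (Int × Int) Int} (g : Int × Int → Int × Int)
    {r p : Int × Int} (hadj : pvRadjD co r p) : pvLexLe (pvStepF co g p) (g r) := by
  refine (foldl_pvLexMin_le _ _).2 (g r) ?_
  rw [List.mem_flatMap]
  refine ⟨r, mem_pvNbrs4_symm hadj.2.2.2, ?_⟩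
  rw [if_pos ⟨hadj.1, hadj.2.2.1.symm⟩]
  exact List.mem_singleton_self _

theorem pvF_mono (co : PySem.Dict (Int × Int) Int) (k : Nat) (p : Int × Int) :
    pvLexLe (pvF co (k + 1) p) (pvF co k p) := pvStepF_le co (pvF co k) p

-- after k rounds a cell's label is an active cell within k steps of it
theorem pvF_reach (co : PySem.Dict (Int × Int) Int) (k : Nat) (p : Int × Int)
    (hp : co.contains p = true) :
    pvReachN co k (pvF co k p) p ∧ co.contains (pvF co k p) = true := by
  induction k generalizing p with
  | zero => exact ⟨rfl, hp⟩
  | succ k ih =>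
    show pvReachN co (k + 1) (pvStepF co (pvF co k) p) p ∧
      co.contains (pvStepF co (pvF co k) p) = true
    rcases foldl_pvLexMin_mem ((pvNbrs4 p).flatMap (fun q =>
        if co.contains q = true ∧ co.getD q 0 = co.getD p 0 then [pvF co k q] else []))
        (pvF co k p) with hm | hm
    · unfold pvStepF
      rw [hm]
      exact ⟨pvReachN_mono (ih p hp).1, (ih p hp).2⟩
    · rw [List.mem_flatMap] at hm
      obtain ⟨q, hq, hv⟩ := hm
      by_cases hc : co.contains q = true ∧ co.getD q 0 = co.getD p 0
      · rw [if_pos hc, List.mem_singleton] at hv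
        have hradj : pvRadjD co q p := ⟨hc.1, hp, hc.2.symm, mem_pvNbrs4_symm hq⟩
        unfold pvStepF
        rw [hv]
        exact ⟨Or.inr ⟨q, hradj, (ih q hc.1).1⟩, (ih q hc.1).2⟩
      · rw [if_neg hc] at hv
        exact absurd hv (List.not_mem_nil)

-- after k rounds a cell's label is below every cell within k steps of it
theorem pvF_lb (co : PySem.Dict (Int × Int) Int) (k : Nat) (p x : Int × Int)
    (h : pvReachN co k x p) : pvLexLe (pvF co k p) x := by
  induction k generalizing p with
  | zero => exact h ▸ pvLexLe_refl _
  | succ k ih =>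
    rcases h with h' | ⟨r, hr, h'⟩
    · exact pvLexLe_trans (pvF_mono co k p) (ih p h')
    · exact pvLexLe_trans (pvStepF_le_cand (pvF co k) hr) (ih r h')

-- keys-many rounds reach the fixpoint
theorem pvF_fix (co : PySem.Dict (Int × Int) Int) (p : Int × Int) (hp : co.contains p = true) :
    pvStepF co (pvF co co.keys.length) p = pvF co co.keys.length p := by
  set N := co.keys.length with hN
  have h1 : pvLexLe (pvF co (N + 1) p) (pvF co N p) := pvF_mono co N p
  have h2 : pvLexLe (pvF co N p) (pvF co (N + 1) p) := by
    obtain ⟨hr, hc⟩ := pvF_reach co (N + 1) p hp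
    exact pvF_lb co N p _ (pvReach_shortcut hc (pvReachN_to_rtg hr))
  exact pvLexLe_antisymm h1 h2

-- at the fixpoint, labels agree across an edge, hence along components
theorem pvFix_edge {co : PySem.Dict (Int × Int) Int} {M : Nat}
    (hfix : ∀ p, co.contains p = true → pvStepF co (pvF co M) p = pvF co M p)
    {p q : Int × Int} (hadj : pvRadjD co p q) : pvF co M p = pvF co M q := by
  have h1 : pvLexLe (pvF co M p) (pvF co M q) := by
    rw [← hfix p hadj.1]
    exact pvStepF_le_cand (pvF co M) (pvRadjD_symm hadj)
  have h2 : pvLexLe (pvF co M q) (pvF co M p) := by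
    rw [← hfix q hadj.2.1]
    exact pvStepF_le_cand (pvF co M) hadj
  exact pvLexLe_antisymm h1 h2

theorem pvFix_const {co : PySem.Dict (Int × Int) Int} {M : Nat}
    (hfix : ∀ p, co.contains p = true → pvStepF co (pvF co M) p = pvF co M p)
    {p x : Int × Int} (h : Relation.ReflTransGen (pvRadjD co) p x) :
    pvF co M p = pvF co M x := by
  induction h with
  | refl => rfl
  | tail _ hadj ih => exact ih.trans (pvFix_edge hfix hadj)

-- a cell's fixpoint label lies in its component
theorem pvFix_mem {co : PySem.Dict (Int × Int) Int} (M : Nat) {p : Int × Int}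
    (hp : co.contains p = true) :
    Relation.ReflTransGen (pvRadjD co) p (pvF co M p) := by
  have := (pvF_reach co M p hp).1
  exact (Relation.ReflTransGen.symmetric (fun _ _ h => pvRadjD_symm h)) (pvReachN_to_rtg this)

-- two cells have the same fixpoint label iff they lie in the same component
theorem pvFix_label_eq_iff {co : PySem.Dict (Int × Int) Int} {M : Nat}
    (hfix : ∀ p, co.contains p = true → pvStepF co (pvF co M) p = pvF co M p)
    {p x : Int × Int} (hp : co.contains p = true) (hx : co.contains x = true) :
    pvF co M x = pvF co M p ↔ Relation.ReflTransGen (pvRadjD co) p x := by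
  constructor
  · intro heq
    have h1 := pvFix_mem M hp
    have h2 := pvFix_mem M hx
    rw [heq] at h2
    exact h1.trans ((Relation.ReflTransGen.symmetric (fun _ _ h => pvRadjD_symm h)) h2)
  · intro hcomp
    exact (pvFix_const hfix hcomp).symm

-- 'lab carries the label function g on the key list K'
def pvRep (K : List (Int × Int)) (lab : PySem.Dict (Int × Int) (Int × Int))
    (g : Int × Int → Int × Int) : Prop :=
  lab.items = K.map (fun p => (p, g p))

theorem pvRep_keys {K : List (Int × Int)} {lab : PySem.Dict (Int × Int) (Int × Int)}
    {g : Int × Int → Int × Int} (hrep : pvRep K lab g) : lab.keys = K := by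
  show lab.items.map (·.1) = K
  rw [hrep, List.map_map]
  simp [Function.comp_def]

theorem pvRep_get?_mem {K : List (Int × Int)} {lab : PySem.Dict (Int × Int) (Int × Int)}
    {g : Int × Int → Int × Int} (hrep : pvRep K lab g) (hnd : K.Nodup)
    {q : Int × Int} (hq : q ∈ K) : lab.get? q = some (g q) := by
  have hmem : (q, g q) ∈ lab.items := by
    rw [hrep, List.mem_map]
    exact ⟨q, hq, rfl⟩
  have hknd : lab.keys.Nodup := by
    rw [pvRep_keys hrep]
    exact hnd
  exact PySem.Dict.get?_of_mem_items lab hmem hknd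

theorem pvRep_get?_not_mem {K : List (Int × Int)} {lab : PySem.Dict (Int × Int) (Int × Int)}
    {g : Int × Int → Int × Int} (hrep : pvRep K lab g)
    {q : Int × Int} (hq : q ∉ K) : lab.get? q = none := by
  refine (PySem.Dict.get?_eq_none_iff_not_mem_keys _ _).mpr ?_
  rw [pvRep_keys hrep]
  exact hq

theorem pvRound_rep {co : PySem.Dict (Int × Int) Int} {lab : PySem.Dict (Int × Int) (Int × Int)}
    {g : Int × Int → Int × Int} (hnd : co.keys.Nodup) (hrep : pvRep co.keys lab g) :
    pvRep co.keys (pvRound co lab) (pvStepF co g) := by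
  unfold pvRound pvRep
  rw [hrep, List.foldl_map]
  have hfresh : ∀ a ∈ co.keys, (PySem.Dict.empty : PySem.Dict (Int × Int) (Int × Int)).contains a = false := by
    intro a _
    exact PySem.Dict.contains_empty a
  have hitems := PySem.Dict.items_foldl_insert_fresh co.keys
    (fun p => p) (fun p => (pvCands co lab (p, g p).1).foldl pvLexMin (p, g p).2)
    PySem.Dict.empty hfresh (by simpa using hnd)
  rw [hitems]
  show ([] : List ((Int × Int) × (Int × Int))) ++ _ = _
  rw [List.nil_append]
  refine List.map_congr_left ?_
  intro p hp
  refine congrArg (fun v => (p, v)) ?_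
  show (pvCands co lab p).foldl pvLexMin (g p) = pvStepF co g p
  unfold pvCands pvStepF
  congr 1
  refine List.flatMap_congr ?_
  intro q _
  by_cases hq : q ∈ co.keys
  · rw [pvRep_get?_mem hrep hnd hq]
    have hc : co.contains q = true := (PySem.Dict.contains_iff_mem_keys _ _).mpr hq
    by_cases hcol : co.getD q 0 = co.getD p 0
    · simp [hcol, hc]
    · simp [hcol]
  · rw [pvRep_get?_not_mem hrep hq]
    have hc : ¬ co.contains q = true := fun h => hq ((PySem.Dict.contains_iff_mem_keys _ _).mp h)
    simp [hc]

-- once the break flag is set the loop state never changes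
theorem pvFlagTrue (co : PySem.Dict (Int × Int) Int) (l : List Int)
    (s : PySem.Dict (Int × Int) (Int × Int) × Bool) (hs : s.2 = true) :
    l.foldl (fun s _ =>
      if s.2 then s else
        let nw := pvRound co s.1
        if nw = s.1 then (s.1, true) else (nw, false)) s = s := by
  induction l with
  | nil => rfl
  | cons b l ih =>
    rw [List.foldl_cons, if_pos hs]
    exact ih

-- the flagged propagation loop: invariant through one run of the fold
theorem pvIter_go (co : PySem.Dict (Int × Int) Int) (hnd : co.keys.Nodup)
    (l : List Int) (s : PySem.Dict (Int × Int) (Int × Int) × Bool) (m : Nat)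
    (hrep : pvRep co.keys s.1 (pvF co m))
    (hflag : s.2 = true → ∀ p, co.contains p = true → pvStepF co (pvF co m) p = pvF co m p) :
    ∃ m', pvRep co.keys ((l.foldl (fun s _ =>
        if s.2 then s else
          let nw := pvRound co s.1
          if nw = s.1 then (s.1, true) else (nw, false)) s).1) (pvF co m') ∧
      ((l.foldl (fun s _ =>
        if s.2 then s else
          let nw := pvRound co s.1
          if nw = s.1 then (s.1, true) else (nw, false)) s).2 = true →
        ∀ p, co.contains p = true → pvStepF co (pvF co m') p = pvF co m' p) ∧
      ((l.foldl (fun s _ =>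
        if s.2 then s else
          let nw := pvRound co s.1
          if nw = s.1 then (s.1, true) else (nw, false)) s).2 = false → m' = m + l.length) := by
  induction l generalizing s m with
  | nil => exact ⟨m, hrep, hflag, fun _ => rfl⟩
  | cons a l ih =>
    rw [List.foldl_cons]
    by_cases hs : s.2 = true
    · rw [if_pos hs]
      obtain ⟨m', h1, h2, h3⟩ := ih s m hrep hflag
      refine ⟨m', h1, h2, fun hf => ?_⟩
      rw [pvFlagTrue co l s hs, hs] at hf
      cases hf
    · rw [if_neg hs]
      have hrep' : pvRep co.keys (pvRound co s.1) (pvF co (m + 1)) := pvRound_rep hnd hrep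
      by_cases heq : pvRound co s.1 = s.1
      · rw [if_pos heq]
        have hfixm : ∀ p, co.contains p = true → pvStepF co (pvF co m) p = pvF co m p := by
          intro p hp
          have : pvRep co.keys s.1 (pvF co (m + 1)) := heq ▸ hrep'
          have hmapeq : co.keys.map (fun p => (p, pvF co (m + 1) p)) =
              co.keys.map (fun p => (p, pvF co m p)) := by
            rw [← this, ← hrep]
          have := List.map_inj_left.mp hmapeq p ((PySem.Dict.contains_iff_mem_keys _ _).mp hp)
          have hval : pvF co (m + 1) p = pvF co m p := congrArg Prod.snd this
          exact hval
        obtain ⟨m', h1, h2, h3⟩ := ih (s.1, true) m hrep (fun _ => hfixm)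
        refine ⟨m', h1, h2, fun hf => ?_⟩
        rw [pvFlagTrue co l (s.1, true) rfl] at hf
        cases hf
      · rw [if_neg heq]
        obtain ⟨m', h1, h2, h3⟩ := ih (pvRound co s.1, false) (m + 1) hrep' (by simp)
        refine ⟨m', h1, h2, fun hf => ?_⟩
        have := h3 hf
        simp only [List.length_cons]
        omega

-- the whole propagation produces a fixpoint labelling
theorem pvIter (co : PySem.Dict (Int × Int) Int) (hnd : co.keys.Nodup)
    (lab0 : PySem.Dict (Int × Int) (Int × Int))
    (hlab0 : pvRep co.keys lab0 (pvF co 0))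
    (hsz : (PySem.List.pyRange 0 (lab0.size) 1).length = co.keys.length) :
    ∃ M, pvRep co.keys (((PySem.List.pyRange 0 (lab0.size) 1).foldl (fun s _ =>
        if s.2 then s else
          let nw := pvRound co s.1
          if nw = s.1 then (s.1, true) else (nw, false)) (lab0, false)).1) (pvF co M) ∧
      ∀ p, co.contains p = true → pvStepF co (pvF co M) p = pvF co M p := by
  obtain ⟨m', h1, h2, h3⟩ := pvIter_go co hnd (PySem.List.pyRange 0 (lab0.size) 1)
    (lab0, false) 0 hlab0 (by simp)
  refine ⟨m', h1, ?_⟩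
  by_cases hf : (((PySem.List.pyRange 0 (lab0.size) 1)).foldl (fun s _ =>
      if s.2 then s else
        let nw := pvRound co s.1
        if nw = s.1 then (s.1, true) else (nw, false)) (lab0, false)).2 = true
  · exact h2 hf
  · have hm : m' = co.keys.length := by
      have := h3 (by simpa using hf)
      omega
    intro p hp
    rw [hm]
    exact pvF_fix co p hp

theorem foldl_nested_flatMap {α β γ : Type} (hs : List α) (g : α → List β)
    (step : γ → β → γ) (d0 : γ) :
    hs.foldl (fun d i => (g i).foldl step d) d0 = (hs.flatMap g).foldl step d0 := by
  induction hs generalizing d0 with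
  | nil => rfl
  | cons a l ih => simp only [List.foldl_cons, List.flatMap_cons, List.foldl_append, ih]

-- the (cell, colour) pairs the colour_of loop inserts, in scan order
def pvCellsAll (grid : List (List Int)) (h w : Int) : List ((Int × Int) × Int) :=
  (PySem.List.pyRange 0 h 1).flatMap (fun i =>
    (PySem.List.enumerate (PySem.List.slice (PySem.List.pyGetD grid i []) none (some w)) 0).map
      (fun p => ((i, p.1), p.2)))

theorem pvColourOf_eq_fold (grid : List (List Int)) (h w bc bg : Int) :
    pvColourOf grid h w bc bg =
      ((pvCellsAll grid h w).filter (fun pr => decide (pr.2 ≠ bc ∧ pr.2 ≠ bg))).foldl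
        (fun d pr => d.insert pr.1 pr.2) PySem.Dict.empty := by
  unfold pvColourOf pvCellsAll
  have hinner : ∀ (i : Int) (d : PySem.Dict (Int × Int) Int),
      (PySem.List.enumerate (PySem.List.slice (PySem.List.pyGetD grid i []) none (some w)) 0).foldl
        (fun d p => if p.2 ≠ bc ∧ p.2 ≠ bg then d.insert (i, p.1) p.2 else d) d =
      ((PySem.List.enumerate (PySem.List.slice (PySem.List.pyGetD grid i []) none (some w)) 0).map
        (fun p => ((i, p.1), p.2))).foldl
        (fun d pr => if pr.2 ≠ bc ∧ pr.2 ≠ bg then d.insert pr.1 pr.2 else d) d := by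
    intro i d
    rw [List.foldl_map]
  have hcong : (PySem.List.pyRange 0 h 1).foldl (fun d i =>
      (PySem.List.enumerate (PySem.List.slice (PySem.List.pyGetD grid i []) none (some w)) 0).foldl
        (fun d p => if p.2 ≠ bc ∧ p.2 ≠ bg then d.insert (i, p.1) p.2 else d) d)
      PySem.Dict.empty =
      (PySem.List.pyRange 0 h 1).foldl (fun d i =>
      (((PySem.List.enumerate (PySem.List.slice (PySem.List.pyGetD grid i []) none (some w)) 0).map
        (fun p => ((i, p.1), p.2)))).foldl
        (fun d pr => if pr.2 ≠ bc ∧ pr.2 ≠ bg then d.insert pr.1 pr.2 else d) d)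
      PySem.Dict.empty := by
    refine congrFun (congrFun (congrArg _ ?_) _) _
    funext d i
    exact hinner i d
  rw [hcong, foldl_nested_flatMap]
  exact PySem.List.foldl_ite_eq_foldl_filter _ _ _ _

theorem pvCellsAll_keys_nodup (grid : List (List Int)) (h w : Int) :
    ((pvCellsAll grid h w).map (fun pr => pr.1)).Nodup := by
  unfold pvCellsAll
  rw [List.map_flatMap]
  rw [List.nodup_flatMap]
  constructor
  · intro i _
    rw [List.map_map]
    have heq : ((fun pr => pr.1) ∘ fun p => ((i, p.1), p.2)) = (fun (j : Int) => (i, j)) ∘ (fun (p : Int × Int) => p.1) := by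
      funext p; rfl
    rw [heq, ← List.map_map]
    refine List.Nodup.map ?_ ?_
    · intro a b hab
      exact congrArg Prod.snd hab
    · rw [PySem.List.map_fst_enumerate]
      simp [PySem.List.nodup_pyRange_one]
  · have hnd := PySem.List.nodup_pyRange_one (a := (0 : Int)) (b := h)
    refine List.Pairwise.imp_of_mem ?_ hnd
    intro i j _ _ hij
    intro x hx hx'
    simp only [List.map_map, List.mem_map] at hx hx'
    obtain ⟨p, _, rfl⟩ := hx
    obtain ⟨p', _, hp'⟩ := hx'
    exact hij (congrArg (fun z => z.1) hp').symm

theorem pvColourOf_items (grid : List (List Int)) (h w bc bg : Int) :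
    (pvColourOf grid h w bc bg).items =
      (pvCellsAll grid h w).filter (fun pr => decide (pr.2 ≠ bc ∧ pr.2 ≠ bg)) := by
  rw [pvColourOf_eq_fold]
  have hnd : (((pvCellsAll grid h w).filter
      (fun pr => decide (pr.2 ≠ bc ∧ pr.2 ≠ bg))).map (fun pr => pr.1)).Nodup := by
    have hsub : (((pvCellsAll grid h w).filter
        (fun pr => decide (pr.2 ≠ bc ∧ pr.2 ≠ bg))).map (fun pr => pr.1)).Sublist
        ((pvCellsAll grid h w).map (fun pr => pr.1)) :=
      List.Sublist.map _ List.filter_sublist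
    exact (pvCellsAll_keys_nodup grid h w).sublist hsub
  have := PySem.Dict.items_foldl_insert_fresh
    ((pvCellsAll grid h w).filter (fun pr => decide (pr.2 ≠ bc ∧ pr.2 ≠ bg)))
    (fun pr => pr.1) (fun pr => pr.2) PySem.Dict.empty
    (fun a _ => PySem.Dict.contains_empty a.1) hnd
  simp only at this ⊢
  rw [show (fun (d : PySem.Dict (Int × Int) Int) (pr : (Int × Int) × Int) => d.insert pr.1 pr.2)
      = fun d pr => d.insert ((fun (pr : (Int × Int) × Int) => pr.1) pr)
        ((fun (pr : (Int × Int) × Int) => pr.2) pr) from rfl]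
  rw [this, show (PySem.Dict.empty : PySem.Dict (Int × Int) Int).items = [] from rfl]
  simp

theorem mem_pvCellsAll (grid : List (List Int)) (x : Int × Int) (v : Int)
    (hrow : ∀ row ∈ grid, (PySem.List.pyGetD grid 0 []).length ≤ row.length) :
    ((x, v) ∈ pvCellsAll grid (grid.length : Int) ((PySem.List.pyGetD grid 0 []).length : Int)) ↔
      (0 ≤ x.1 ∧ x.1 < (grid.length : Int) ∧ 0 ≤ x.2 ∧
        x.2 < ((PySem.List.pyGetD grid 0 []).length : Int) ∧ v = pvAt grid x.1 x.2) := by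
  set w0 := (PySem.List.pyGetD grid 0 []).length with hw0
  unfold pvCellsAll
  rw [List.mem_flatMap]
  constructor
  · rintro ⟨i, hi, hmem⟩
    rw [List.mem_map] at hmem
    obtain ⟨p, hp, hpe⟩ := hmem
    rw [PySem.List.mem_pyRange_one] at hi
    have hrow' : PySem.List.pyGetD grid i [] = grid[i.toNat] :=
      PySem.List.pyGetD_eq_getElem grid [] hi.1 (by exact_mod_cast hi.2)
    have hsl : PySem.List.slice (PySem.List.pyGetD grid i []) none (some (w0 : Int)) =
        grid[i.toNat].take w0 := by
      rw [hrow']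
      exact PySem.List.slice_to_natCast _ _
    rw [hsl, PySem.List.mem_enumerate_iff] at hp
    obtain ⟨k, hk, hpk⟩ := hp
    have hlen : (grid[i.toNat].take w0).length = w0 := by
      rw [List.length_take]
      have := hrow grid[i.toNat] (List.getElem_mem _)
      omega
    rw [hlen] at hk
    subst hpk
    rw [Prod.mk.injEq] at hpe
    obtain ⟨hx, hv⟩ := hpe
    subst hx
    subst hv
    have hget : ∀ (hh : k < (grid[i.toNat].take w0).length),
        (grid[i.toNat].take w0)[k] = grid[i.toNat][k]'(by
          have := hrow grid[i.toNat] (List.getElem_mem _)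
          rw [hlen] at hh; omega) := fun _ => List.getElem_take
    refine ⟨hi.1, hi.2, by simp, by simpa using (by exact_mod_cast hk : ((k : Int) < (w0 : Int))), ?_⟩
    have hkl : k < grid[i.toNat].length := by
      have := hrow grid[i.toNat] (List.getElem_mem _); omega
    show (grid[i.toNat].take w0)[k]'(by rw [hlen]; exact hk) =
      pvAt grid (i, (0 : Int) + (k : Int)).1 (i, (0 : Int) + (k : Int)).2
    unfold pvAt
    simp only [zero_add]
    rw [hrow', PySem.List.pyGetD_natCast, List.getD_eq_getElem _ _ hkl]
    exact hget _
  · rintro ⟨h1, h2, h3, h4, h5⟩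
    refine ⟨x.1, ?_, ?_⟩
    · rw [PySem.List.mem_pyRange_one]; exact ⟨h1, h2⟩
    · rw [List.mem_map]
      have hrow' : PySem.List.pyGetD grid x.1 [] = grid[x.1.toNat] :=
        PySem.List.pyGetD_eq_getElem grid [] h1 (by exact_mod_cast h2)
      have hsl : PySem.List.slice (PySem.List.pyGetD grid x.1 []) none (some (w0 : Int)) =
          grid[x.1.toNat].take w0 := by
        rw [hrow']
        exact PySem.List.slice_to_natCast _ _
      have hlb := hrow grid[x.1.toNat] (List.getElem_mem _)
      have hlen : (grid[x.1.toNat].take w0).length = w0 := by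
        rw [List.length_take]; omega
      refine ⟨(x.2, v), ?_, ?_⟩
      · rw [hsl, PySem.List.mem_enumerate_iff]
        refine ⟨x.2.toNat, by omega, ?_⟩
        have hx2 : (0 : Int) + (x.2.toNat : Int) = x.2 := by omega
        have hval : (grid[x.1.toNat].take w0)[x.2.toNat]'(by omega) =
            grid[x.1.toNat][x.2.toNat]'(by omega) := List.getElem_take
        rw [Prod.ext_iff]
        refine ⟨by simpa using hx2.symm, ?_⟩
        show v = (grid[x.1.toNat].take w0)[x.2.toNat]'(by omega)
        rw [hval, h5]
        unfold pvAt
        rw [hrow', PySem.List.pyGetD_of_nonneg _ _ h3,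
          List.getD_eq_getElem _ _ (by omega : x.2.toNat < grid[x.1.toNat].length)]
      · show ((x.1, x.2), v) = (x, v)
        rw [Prod.ext_iff]
        exact ⟨Prod.ext rfl rfl, rfl⟩

theorem pvColourOf_get? (grid : List (List Int)) (bc bg : Int)
    (hrow : ∀ row ∈ grid, (PySem.List.pyGetD grid 0 []).length ≤ row.length)
    (x : Int × Int) :
    (pvColourOf grid (grid.length : Int) ((PySem.List.pyGetD grid 0 []).length : Int) bc bg).get? x =
      if 0 ≤ x.1 ∧ x.1 < (grid.length : Int) ∧ 0 ≤ x.2 ∧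
          x.2 < ((PySem.List.pyGetD grid 0 []).length : Int) ∧
          pvAt grid x.1 x.2 ≠ bc ∧ pvAt grid x.1 x.2 ≠ bg
      then some (pvAt grid x.1 x.2) else none := by
  have hnd : (pvColourOf grid (grid.length : Int) ((PySem.List.pyGetD grid 0 []).length : Int) bc bg).keys.Nodup := by
    show ((pvColourOf _ _ _ _ _).items.map (·.1)).Nodup
    rw [pvColourOf_items]
    exact ((pvCellsAll_keys_nodup grid _ _).sublist (List.Sublist.map _ List.filter_sublist))
  split
  · next hc =>
    refine PySem.Dict.get?_of_mem_items _ ?_ hnd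
    rw [pvColourOf_items, List.mem_filter]
    constructor
    · exact (mem_pvCellsAll grid x _ hrow).mpr ⟨hc.1, hc.2.1, hc.2.2.1, hc.2.2.2.1, rfl⟩
    · simpa using ⟨hc.2.2.2.2.1, hc.2.2.2.2.2⟩
  · next hc =>
    refine (PySem.Dict.get?_eq_none_iff_not_mem_keys _ _).mpr ?_
    intro hmem
    show False
    have : ∃ v, (x, v) ∈ (pvColourOf grid (grid.length : Int)
        ((PySem.List.pyGetD grid 0 []).length : Int) bc bg).items := by
      rcases List.mem_map.mp hmem with ⟨pr, hpr, hpre⟩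
      exact ⟨pr.2, by rw [← hpre]; exact hpr⟩
    obtain ⟨v, hv⟩ := this
    rw [pvColourOf_items, List.mem_filter] at hv
    have h1 := (mem_pvCellsAll grid x v hrow).mp hv.1
    have h2 := hv.2
    simp only [decide_eq_true_eq] at h2
    exact hc ⟨h1.1, h1.2.1, h1.2.2.1, h1.2.2.2.1, h1.2.2.2.2 ▸ h2.1, h1.2.2.2.2 ▸ h2.2⟩


-- ---- A-side vocabulary: one BFS expansion and reachability avoiding 'visited' ----

def pvNbrs (r c : Int) : List (Int × Int) := [(r + 1, c), (r - 1, c), (r, c + 1), (r, c - 1)]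

def pvGood (grid : List (List Int)) (h w colour : Int) (x : Int × Int) : Prop :=
  (0 ≤ x.1 ∧ x.1 < h) ∧ (0 ≤ x.2 ∧ x.2 < w) ∧ pvAt grid x.1 x.2 = colour

def pvStepRel (grid : List (List Int)) (h w colour : Int) (vis : Finset (Int × Int))
    (a b : Int × Int) : Prop :=
  b ∈ pvNbrs a.1 a.2 ∧ pvGood grid h w colour b ∧ b ∉ vis

def pvReach (grid : List (List Int)) (h w colour : Int) (vis : Finset (Int × Int))
    (q : List (Int × Int)) (x : Int × Int) : Prop :=
  ∃ y ∈ q, Relation.ReflTransGen (pvStepRel grid h w colour vis) y x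

def pvCellA (grid : List (List Int)) (h w colour : Int)
    (vq : Finset (Int × Int) × List (Int × Int)) (n : Int × Int) :
    Finset (Int × Int) × List (Int × Int) :=
  if (0 ≤ n.1 ∧ n.1 < h) ∧ (0 ≤ n.2 ∧ n.2 < w) ∧ n ∉ vq.1 then
    if pvAt grid n.1 n.2 = colour then (insert n vq.1, vq.2 ++ [n]) else vq
  else vq

theorem foldl_stepA_eq (grid : List (List Int)) (h w colour r c : Int)
    (s : Finset (Int × Int) × List (Int × Int)) :
    pvDirs.foldl (stepA grid h w colour r c) s = (pvNbrs r c).foldl (pvCellA grid h w colour) s := by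
  have hl : pvNbrs r c = pvDirs.map (fun d => (r + d.1, c + d.2)) := by
    simp only [pvNbrs, pvDirs, List.map_cons, List.map_nil, List.cons.injEq, Prod.mk.injEq]
    repeat' apply And.intro
    all_goals first | trivial | omega
  rw [hl, List.foldl_map]
  rfl

-- characterisation of one expansion round of A (fold of pvCellA over any cell list)
theorem cellA_char (grid : List (List Int)) (h w colour : Int) (ns : List (Int × Int)) :
    ∀ (vis : Finset (Int × Int)) (qs : List (Int × Int)),
    ∃ add : List (Int × Int),
      ns.foldl (pvCellA grid h w colour) (vis, qs) = (vis ∪ add.toFinset, qs ++ add) ∧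
      (∀ x ∈ add, x ∈ ns ∧ pvGood grid h w colour x ∧ x ∉ vis) ∧
      (∀ x ∈ ns, pvGood grid h w colour x → x ∉ vis → x ∈ vis ∪ add.toFinset) := by
  have hcell : ∀ (st : Finset (Int × Int) × List (Int × Int)) (n : Int × Int),
      pvCellA grid h w colour st n =
        if ((0 ≤ n.1 ∧ n.1 < h) ∧ (0 ≤ n.2 ∧ n.2 < w) ∧ pvAt grid n.1 n.2 = colour) ∧ n ∉ st.1 then
          (insert n st.1, st.2 ++ [n])
        else st := by
    intro st n
    unfold pvCellA
    split_ifs <;> first | rfl | tauto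
  induction ns with
  | nil => intro vis qs; exact ⟨[], by simp, by simp, by simp⟩
  | cons n ns ih =>
    intro vis qs
    simp only [List.foldl_cons, hcell]
    by_cases hcond :
      ((0 ≤ n.1 ∧ n.1 < h) ∧ (0 ≤ n.2 ∧ n.2 < w) ∧ pvAt grid n.1 n.2 = colour) ∧ n ∉ vis
    · rw [if_pos hcond]
      obtain ⟨add, h1, h2, h3⟩ := ih (insert n vis) (qs ++ [n])
      refine ⟨n :: add, ?_, ?_, ?_⟩
      · rw [h1]
        refine Prod.ext ?_ (by simp)
        simp only [List.toFinset_cons]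
        ext x
        simp only [Finset.mem_union, Finset.mem_insert, List.mem_toFinset]
        tauto
      · intro x hx
        rcases List.mem_cons.mp hx with rfl | hx'
        · exact ⟨List.mem_cons_self, hcond.1, hcond.2⟩
        · obtain ⟨ha, hb, hc⟩ := h2 x hx'
          exact ⟨List.mem_cons_of_mem _ ha, hb, fun hxx => hc (Finset.mem_insert_of_mem hxx)⟩
      · intro x hx hg hnv
        have hset : insert n vis ∪ add.toFinset = vis ∪ (n :: add).toFinset := by
          simp only [List.toFinset_cons]
          ext z
          simp only [Finset.mem_union, Finset.mem_insert, List.mem_toFinset]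
          tauto
        rcases List.mem_cons.mp hx with rfl | hx'
        · rw [← hset]
          exact Finset.mem_union_left _ (Finset.mem_insert_self _ _)
        · by_cases hxn : x ∈ insert n vis
          · rw [← hset]
            exact Finset.mem_union_left _ hxn
          · rw [← hset]
            exact h3 x hx' hg hxn
    · rw [if_neg hcond]
      obtain ⟨add, h1, h2, h3⟩ := ih vis qs
      refine ⟨add, h1, ?_, ?_⟩
      · intro x hx
        obtain ⟨ha, hb, hc⟩ := h2 x hx
        exact ⟨List.mem_cons_of_mem _ ha, hb, hc⟩
      · intro x hx hg hnv
        rcases List.mem_cons.mp hx with rfl | hx'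
        · exact absurd ⟨hg, hnv⟩ hcond
        · exact h3 x hx' hg hnv

-- re-rooting: after popping rc and adding its fresh good neighbours 'add',
-- anything reachable from the old worklist is rc itself or reachable from the new one
theorem reach_shift (grid : List (List Int)) (h w colour : Int)
    {vis : Finset (Int × Int)} {q0 qs add q1 : List (Int × Int)} {rc x : Int × Int}
    (hcov : ∀ y ∈ q0, y = rc ∨ y ∈ qs)
    (hqs : ∀ y ∈ qs, y ∈ q1) (hadd : ∀ y ∈ add, y ∈ q1)
    (hcomplete : ∀ z, z ∈ pvNbrs rc.1 rc.2 → pvGood grid h w colour z → z ∉ vis →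
      z ∈ vis ∪ add.toFinset)
    (hx : pvReach grid h w colour vis q0 x) :
    x = rc ∨ pvReach grid h w colour (vis ∪ add.toFinset) q1 x := by
  obtain ⟨y, hy, p⟩ := hx
  induction p with
  | refl =>
    rcases hcov y hy with rfl | hmem
    · exact Or.inl rfl
    · exact Or.inr ⟨y, hqs y hmem, Relation.ReflTransGen.refl⟩
  | @tail b x p' hstep ih =>
    obtain ⟨hadj, hgood, hnv⟩ := hstep
    rcases ih with rfl | hr
    · have hx1 := hcomplete x hadj hgood hnv
      rcases Finset.mem_union.mp hx1 with hxv | hxa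
      · exact absurd hxv hnv
      · exact Or.inr ⟨x, hadd x (List.mem_toFinset.mp hxa), Relation.ReflTransGen.refl⟩
    · by_cases hx1 : x ∈ vis ∪ add.toFinset
      · rcases Finset.mem_union.mp hx1 with hxv | hxa
        · exact absurd hxv hnv
        · exact Or.inr ⟨x, hadd x (List.mem_toFinset.mp hxa), Relation.ReflTransGen.refl⟩
      · obtain ⟨y', hy', p1⟩ := hr
        exact Or.inr ⟨y', hy', p1.tail ⟨hadj, hgood, hx1⟩⟩

-- ---- floodA: monotonicity, visited-set characterisation, minimum shape ----

theorem floodA_mono (grid : List (List Int)) (h w colour : Int) :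
    ∀ (vis : Finset (Int × Int)) (q : List (Int × Int)) (mr mc : Int),
    vis ⊆ (floodA grid h w colour vis q mr mc).1 := by
  intro vis q mr mc
  induction vis, q, mr, mc using floodA.induct grid h w colour with
  | case1 vis mr mc =>
    rw [floodA]
  | case2 vis mr mc r c qs mr' mc' s =>
    rename_i ih
    obtain ⟨add, h1, _, _⟩ := cellA_char grid h w colour (pvNbrs r c) vis qs
    have hfold : List.foldl (stepA grid h w colour r c) (vis, qs) pvDirs =
        (vis ∪ add.toFinset, qs ++ add) := (foldl_stepA_eq grid h w colour r c _).trans h1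
    have hseq : s = (vis ∪ add.toFinset, qs ++ add) := hfold
    rw [hseq] at ih
    try dsimp only at ih
    rw [floodA]
    try dsimp only
    rw [hfold]
    try dsimp only
    exact subset_trans Finset.subset_union_left ih

theorem floodA_sub (grid : List (List Int)) (h w colour : Int) :
    ∀ (vis : Finset (Int × Int)) (q : List (Int × Int)) (mr mc : Int),
    ∀ x ∈ (floodA grid h w colour vis q mr mc).1,
      x ∈ vis ∨ pvReach grid h w colour vis q x := by
  intro vis q mr mc
  induction vis, q, mr, mc using floodA.induct grid h w colour with
  | case1 vis mr mc =>
    intro x hx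
    rw [floodA] at hx
    exact Or.inl hx
  | case2 vis mr mc r c qs mr' mc' s =>
    rename_i ih
    intro x hx
    obtain ⟨add, h1, h2, _⟩ := cellA_char grid h w colour (pvNbrs r c) vis qs
    have hfold : List.foldl (stepA grid h w colour r c) (vis, qs) pvDirs =
        (vis ∪ add.toFinset, qs ++ add) := (foldl_stepA_eq grid h w colour r c _).trans h1
    have hseq : s = (vis ∪ add.toFinset, qs ++ add) := hfold
    rw [hseq] at ih
    try dsimp only at ih
    rw [floodA] at hx
    try dsimp only at hx
    rw [hfold] at hx
    try dsimp only at hx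
    rcases ih x hx with hv | hr
    · rcases Finset.mem_union.mp hv with hmem | hmem
      · exact Or.inl hmem
      · refine Or.inr ⟨(r, c), List.mem_cons_self, ?_⟩
        obtain ⟨ha, hb, hc⟩ := h2 x (List.mem_toFinset.mp hmem)
        exact Relation.ReflTransGen.single ⟨ha, hb, hc⟩
    · obtain ⟨y, hy, p⟩ := hr
      have p' : Relation.ReflTransGen (pvStepRel grid h w colour vis) y x := by
        refine Relation.ReflTransGen.mono ?_ p
        rintro a b ⟨u1, u2, u3⟩
        exact ⟨u1, u2, fun hb => u3 (Finset.mem_union_left _ hb)⟩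
      rcases List.mem_append.mp hy with hmem | hmem
      · exact Or.inr ⟨y, List.mem_cons_of_mem _ hmem, p'⟩
      · obtain ⟨ha, hb, hc⟩ := h2 y hmem
        exact Or.inr ⟨(r, c), List.mem_cons_self, Relation.ReflTransGen.head ⟨ha, hb, hc⟩ p'⟩

theorem floodA_reach (grid : List (List Int)) (h w colour : Int) :
    ∀ (vis : Finset (Int × Int)) (q : List (Int × Int)) (mr mc : Int),
    (∀ y ∈ q, y ∈ vis) →
    ∀ x, pvReach grid h w colour vis q x → x ∈ (floodA grid h w colour vis q mr mc).1 := by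
  intro vis q mr mc
  induction vis, q, mr, mc using floodA.induct grid h w colour with
  | case1 vis mr mc =>
    rintro hq x ⟨y, hy, p⟩
    simp at hy
  | case2 vis mr mc r c qs mr' mc' s =>
    rename_i ih
    intro hq x hx
    obtain ⟨add, h1, _, h3⟩ := cellA_char grid h w colour (pvNbrs r c) vis qs
    have hfold : List.foldl (stepA grid h w colour r c) (vis, qs) pvDirs =
        (vis ∪ add.toFinset, qs ++ add) := (foldl_stepA_eq grid h w colour r c _).trans h1
    have hseq : s = (vis ∪ add.toFinset, qs ++ add) := hfold
    rw [hseq] at ih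
    try dsimp only at ih
    rw [floodA]
    try dsimp only
    rw [hfold]
    try dsimp only
    have hshift := reach_shift grid h w colour
      (q0 := (r, c) :: qs) (qs := qs) (add := add) (q1 := qs ++ add) (rc := (r, c)) (x := x)
      (fun y hy => List.mem_cons.mp hy)
      (fun y hy => List.mem_append_left _ hy)
      (fun y hy => List.mem_append_right _ hy)
      (fun z hz hg hv => h3 z hz hg hv)
      hx
    rcases hshift with rfl | hr
    · have h0 : (r, c) ∈ vis := hq _ List.mem_cons_self
      exact floodA_mono grid h w colour _ _ _ _ (Finset.mem_union_left _ h0)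
    · refine ih ?_ x hr
      intro y hy
      rcases List.mem_append.mp hy with hmem | hmem
      · exact Finset.mem_union_left _ (hq _ (List.mem_cons_of_mem _ hmem))
      · exact Finset.mem_union_right _ (List.mem_toFinset.mpr hmem)

theorem floodA_min (grid : List (List Int)) (h w colour : Int) :
    ∀ (vis : Finset (Int × Int)) (q : List (Int × Int)) (mr mc : Int),
    ∃ P : List (Int × Int),
      P.toFinset = q.toFinset ∪ ((floodA grid h w colour vis q mr mc).1 \ vis) ∧
      (floodA grid h w colour vis q mr mc).2.1 = (P.map Prod.fst).foldl min mr ∧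
      (floodA grid h w colour vis q mr mc).2.2 = (P.map Prod.snd).foldl min mc := by
  intro vis q mr mc
  induction vis, q, mr, mc using floodA.induct grid h w colour with
  | case1 vis mr mc =>
    refine ⟨[], ?_, ?_, ?_⟩ <;> rw [floodA] <;> simp
  | case2 vis mr mc r c qs mr' mc' s =>
    rename_i ih
    obtain ⟨add, h1, h2, _⟩ := cellA_char grid h w colour (pvNbrs r c) vis qs
    have hfold : List.foldl (stepA grid h w colour r c) (vis, qs) pvDirs =
        (vis ∪ add.toFinset, qs ++ add) := (foldl_stepA_eq grid h w colour r c _).trans h1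
    have hseq : s = (vis ∪ add.toFinset, qs ++ add) := hfold
    rw [hseq] at ih
    try dsimp only at ih
    rw [floodA]
    try dsimp only
    rw [hfold]
    try dsimp only
    obtain ⟨P, hP, hmr, hmc⟩ := ih
    have hres := floodA_mono grid h w colour (vis ∪ add.toFinset) (qs ++ add) mr' mc'
    refine ⟨(r, c) :: P, ?_, ?_, ?_⟩
    · ext z
      have hz1 : z ∈ P.toFinset ↔
          z ∈ qs ∨ z ∈ add ∨
            z ∈ (floodA grid h w colour (vis ∪ add.toFinset) (qs ++ add) mr' mc').1 ∧
              ¬(z ∈ vis ∨ z ∈ add) := by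
        rw [hP]
        simp only [List.toFinset_append, Finset.mem_union, Finset.mem_sdiff,
          List.mem_toFinset]
        tauto
      simp only [List.toFinset_cons, Finset.mem_insert, Finset.mem_union, Finset.mem_sdiff,
        List.mem_toFinset, hz1]
      constructor
      · rintro (rfl | hz)
        · exact Or.inl (Or.inl rfl)
        · rcases hz with hzq | hza | ⟨hzr, hznv⟩
          · exact Or.inl (Or.inr hzq)
          · refine Or.inr ⟨hres (Finset.mem_union_right _ (List.mem_toFinset.mpr hza)), ?_⟩
            exact (h2 z hza).2.2
          · exact Or.inr ⟨hzr, fun hzv => hznv (Or.inl hzv)⟩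
      · rintro ((rfl | hzq) | ⟨hzr, hzv⟩)
        · exact Or.inl rfl
        · exact Or.inr (Or.inl hzq)
        · by_cases hza : z ∈ add
          · exact Or.inr (Or.inr (Or.inl hza))
          · exact Or.inr (Or.inr (Or.inr ⟨hzr, fun hc => hc.elim hzv hza⟩))
    · have e1 : (if r < mr then r else mr) = mr' := rfl
      have e2 : (if c < mc then c else mc) = mc' := rfl
      rw [e1, e2, hmr]
      simp only [List.map_cons, List.foldl_cons]
      have e3 : mr' = min mr r := by
        rw [← e1, min_def]
        split_ifs <;> omega
      rw [e3]
    · have e1 : (if r < mr then r else mr) = mr' := rfl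
      have e2 : (if c < mc then c else mc) = mc' := rfl
      rw [e1, e2, hmc]
      simp only [List.map_cons, List.foldl_cons]
      have e3 : mc' = min mc c := by
        rw [← e2, min_def]
        split_ifs <;> omega
      rw [e3]

-- ---- Int minimum folds only depend on the set of elements ----
theorem min_cons_eq {a b : Int} {l m : List Int} (h : (a :: l).toFinset = (b :: m).toFinset) :
    l.foldl min a = m.foldl min b := by
  have hmem : ∀ x, x ∈ a :: l ↔ x ∈ b :: m := by
    intro x
    rw [← List.mem_toFinset, h, List.mem_toFinset]
  have h1 : ∀ x ∈ a :: l, l.foldl min a ≤ x → True := fun _ _ _ => trivial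
  obtain ⟨hle1, hall1⟩ := PySem.List.foldl_min_le l a
  obtain ⟨hle2, hall2⟩ := PySem.List.foldl_min_le m b
  have hm1 : ∀ x ∈ a :: l, l.foldl min a ≤ x := by
    intro x hx
    rcases List.mem_cons.mp hx with rfl | hx'
    · exact hle1
    · exact hall1 _ hx'
  have hm2 : ∀ x ∈ b :: m, m.foldl min b ≤ x := by
    intro x hx
    rcases List.mem_cons.mp hx with rfl | hx'
    · exact hle2
    · exact hall2 _ hx'
  apply le_antisymm
  · refine hm1 _ ((hmem _).mpr ?_)
    rcases PySem.List.foldl_min_mem m b with h2 | h2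
    · rw [h2]; exact List.mem_cons_self
    · exact List.mem_cons_of_mem _ h2
  · refine hm2 _ ((hmem _).mp ?_)
    rcases PySem.List.foldl_min_mem l a with h2 | h2
    · rw [h2]; exact List.mem_cons_self
    · exact List.mem_cons_of_mem _ h2


-- ---- bridging A's guarded BFS reachability with the abstract component relation ----

theorem mem_pvNbrs_iff_nbrs4 (a b : Int) (x : Int × Int) :
    x ∈ pvNbrs a b ↔ x ∈ pvNbrs4 (a, b) := by
  obtain ⟨u, v⟩ := x
  simp only [pvNbrs, pvNbrs4, List.mem_cons, List.not_mem_nil, or_false, Prod.mk.injEq]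
  omega

theorem pv_rtg_contains {co : PySem.Dict (Int × Int) Int} {p x : Int × Int}
    (hp : co.contains p = true)
    (h : Relation.ReflTransGen (pvRadjD co) p x) : co.contains x = true := by
  induction h with
  | refl => exact hp
  | tail _ hadj _ => exact hadj.2.1

-- the activity context: what containment in colour_of means about the grid
def pvCtx (grid : List (List Int)) (H W bc bg : Int) (co : PySem.Dict (Int × Int) Int) : Prop :=
  ∀ v : Int × Int, (co.contains v = true ↔
      ((0 ≤ v.1 ∧ v.1 < H) ∧ (0 ≤ v.2 ∧ v.2 < W) ∧
        pvAt grid v.1 v.2 ≠ bc ∧ pvAt grid v.1 v.2 ≠ bg)) ∧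
    (co.contains v = true → co.getD v 0 = pvAt grid v.1 v.2)

-- forward: a guarded BFS chain from an active seed is a component chain
theorem pv_stepRel_to_rtg {grid : List (List Int)} {H W bc bg : Int}
    {co : PySem.Dict (Int × Int) Int} (hctx : pvCtx grid H W bc bg co)
    {p x : Int × Int} (hp : co.contains p = true)
    {vis : Finset (Int × Int)}
    (h : Relation.ReflTransGen (pvStepRel grid H W (pvAt grid p.1 p.2) vis) p x) :
    Relation.ReflTransGen (pvRadjD co) p x := by
  have hcolp : co.getD p 0 = pvAt grid p.1 p.2 := (hctx p).2 hp
  have main : Relation.ReflTransGen (pvRadjD co) p x ∧ co.contains x = true ∧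
      co.getD x 0 = pvAt grid p.1 p.2 := by
    induction h with
    | refl => exact ⟨Relation.ReflTransGen.refl, hp, hcolp⟩
    | @tail b y _ hstep ih =>
      obtain ⟨hrtg, hcb, hcolb⟩ := ih
      obtain ⟨hnb, hgood, _⟩ := hstep
      have hpa : pvAt grid y.1 y.2 = pvAt grid p.1 p.2 := hgood.2.2
      have hone : pvAt grid p.1 p.2 ≠ bc ∧ pvAt grid p.1 p.2 ≠ bg := by
        have := ((hctx p).1.mp hp).2.2
        exact this
      have hcy : co.contains y = true := by
        refine ((hctx y).1).mpr ⟨hgood.1, hgood.2.1, ?_, ?_⟩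
        · rw [hpa]; exact hone.1
        · rw [hpa]; exact hone.2
      have hcoly : co.getD y 0 = pvAt grid p.1 p.2 := by
        rw [(hctx y).2 hcy, hpa]
      refine ⟨hrtg.tail ⟨hcb, hcy, ?_, ?_⟩, hcy, hcoly⟩
      · rw [hcoly, hcolb]
      · obtain ⟨b1, b2⟩ := b
        exact (mem_pvNbrs_iff_nbrs4 b1 b2 y).mp hnb
  exact main.1

theorem pv_walk_support_rtg {co : PySem.Dict (Int × Int) Int} {u x : Int × Int}
    (wk : (pvGraphD co).Walk u x) :
    ∀ v ∈ wk.support, Relation.ReflTransGen (pvRadjD co) u v := by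
  induction wk with
  | nil =>
    intro v hv
    rw [SimpleGraph.Walk.support_nil, List.mem_singleton] at hv
    exact hv ▸ Relation.ReflTransGen.refl
  | @cons a b c hadj wk' ih =>
    intro v hv
    rw [SimpleGraph.Walk.support_cons] at hv
    rcases List.mem_cons.mp hv with rfl | hv'
    · exact Relation.ReflTransGen.refl
    · exact Relation.ReflTransGen.head hadj (ih v hv')

-- backward: a walk whose interior avoids 'blocked' is a guarded BFS chain
theorem pv_walk_to_stepRel {grid : List (List Int)} {H W bc bg colour : Int}
    {co : PySem.Dict (Int × Int) Int} (hctx : pvCtx grid H W bc bg co)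
    {blocked : Finset (Int × Int)} :
    ∀ {u x : Int × Int} (wk : (pvGraphD co).Walk u x),
    co.getD u 0 = colour →
    (∀ v ∈ wk.support.tail, v ∉ blocked) →
    Relation.ReflTransGen (pvStepRel grid H W colour blocked) u x := by
  intro u x wk
  induction wk with
  | nil => intro _ _; exact Relation.ReflTransGen.refl
  | @cons a b c hadj wk' ih =>
    intro hcol hvis
    have hb : co.contains b = true := hadj.2.1
    have hcolb : co.getD b 0 = colour := by rw [hadj.2.2.1, hcol]
    have hbsupp : b ∈ (SimpleGraph.Walk.cons hadj wk').support.tail := by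
      rw [SimpleGraph.Walk.support_cons]
      show b ∈ wk'.support
      exact SimpleGraph.Walk.start_mem_support wk'
    have hstep : pvStepRel grid H W colour blocked a b := by
      refine ⟨?_, ?_, hvis b hbsupp⟩
      · obtain ⟨a1, a2⟩ := a
        exact (mem_pvNbrs_iff_nbrs4 a1 a2 b).mpr hadj.2.2.2
      · obtain ⟨h1, h2, _⟩ := ((hctx b).1).mp hb
        refine ⟨h1, h2, ?_⟩
        rw [← (hctx b).2 hb, hcolb]
    refine Relation.ReflTransGen.head hstep (ih hcolb ?_)
    intro v hv
    refine hvis v ?_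
    rw [SimpleGraph.Walk.support_cons]
    show v ∈ wk'.support
    exact List.mem_of_mem_tail hv



-- a component chain from p, avoiding visited cells disjoint from the component,
-- is a guarded BFS chain from the singleton queue [p]
theorem pv_rtg_to_reach {grid : List (List Int)} {H W bc bg : Int}
    {co : PySem.Dict (Int × Int) Int} (hctx : pvCtx grid H W bc bg co)
    {p x : Int × Int} (hp : co.contains p = true)
    {vis : Finset (Int × Int)}
    (hdis : ∀ y ∈ vis, ¬ Relation.ReflTransGen (pvRadjD co) p y)
    (h : Relation.ReflTransGen (pvRadjD co) p x) (hne : x ≠ p) :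
    pvReach grid H W (pvAt grid p.1 p.2) (insert p vis) [p] x := by
  have hreach : (pvGraphD co).Reachable p x := by
    clear hne hdis
    induction h with
    | refl => exact SimpleGraph.Reachable.refl _
    | tail _ hadj ih => exact ih.trans (SimpleGraph.Adj.reachable (G := pvGraphD co) hadj)
  obtain ⟨wk0⟩ := hreach
  have hpath := wk0.bypass_isPath
  refine ⟨p, List.mem_singleton_self p, ?_⟩
  refine pv_walk_to_stepRel hctx wk0.bypass ((hctx p).2 hp) ?_
  intro v hv
  have hvsup : v ∈ wk0.bypass.support := List.mem_of_mem_tail hv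
  have hvrtg : Relation.ReflTransGen (pvRadjD co) p v :=
    pv_walk_support_rtg wk0.bypass v hvsup
  have hvne : v ≠ p := by
    intro hvp
    subst hvp
    have := hpath.support_nodup
    rw [SimpleGraph.Walk.support_eq_cons] at this
    exact (List.nodup_cons.mp this).1 hv
  rw [Finset.mem_insert]
  rintro (hc | hc)
  · exact hvne hc
  · exact hdis v hc hvrtg

-- the flood fill from a fresh seed visits exactly the old set plus the seed's component
theorem floodA_comp_char {grid : List (List Int)} {H W bc bg : Int}
    {co : PySem.Dict (Int × Int) Int} (hctx : pvCtx grid H W bc bg co)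
    {p : Int × Int} (hp : co.contains p = true)
    {vis : Finset (Int × Int)}
    (hdis : ∀ y ∈ vis, ¬ Relation.ReflTransGen (pvRadjD co) p y) :
    ∀ x, x ∈ (floodA grid H W (pvAt grid p.1 p.2) (insert p vis) [p] p.1 p.2).1 ↔
      (x ∈ vis ∨ Relation.ReflTransGen (pvRadjD co) p x) := by
  intro x
  constructor
  · intro hx
    rcases floodA_sub grid H W (pvAt grid p.1 p.2) (insert p vis) [p] p.1 p.2 x hx with hv | hr
    · rcases Finset.mem_insert.mp hv with rfl | hv'
      · exact Or.inr Relation.ReflTransGen.refl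
      · exact Or.inl hv'
    · obtain ⟨y, hy, hchain⟩ := hr
      rw [List.mem_singleton] at hy
      subst hy
      exact Or.inr (pv_stepRel_to_rtg hctx hp hchain)
  · intro hx
    have hmono := floodA_mono grid H W (pvAt grid p.1 p.2) (insert p vis) [p] p.1 p.2
    rcases hx with hv | hr
    · exact hmono (Finset.mem_insert_of_mem hv)
    · by_cases hne : x = p
      · exact hne ▸ hmono (Finset.mem_insert_self _ _)
      · refine floodA_reach grid H W (pvAt grid p.1 p.2) (insert p vis) [p] p.1 p.2 ?_ x
          (pv_rtg_to_reach hctx hp hdis hr hne)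
        intro y hy
        rw [List.mem_singleton] at hy
        exact hy ▸ Finset.mem_insert_self _ _

-- B's min() over a matched cell list equals A's running minimum
theorem pvMinD_eq (l : List Int) (a : Int) (P : List Int)
    (h : l.toFinset = (a :: P).toFinset) (hne : l ≠ []) :
    (match PySem.List.min? l (fun x => x) with | some m => m | none => 0) = P.foldl min a := by
  obtain ⟨c, cs, rfl⟩ := List.exists_cons_of_ne_nil hne
  rw [PySem.List.min?_id_cons]
  exact min_cons_eq h



-- ---- the two component scans advance in lockstep ----

theorem pv_step_couple {grid : List (List Int)} {H W bc bg : Int}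
    {co : PySem.Dict (Int × Int) Int} {labF : PySem.Dict (Int × Int) (Int × Int)} {M : Nat}
    (hctx : pvCtx grid H W bc bg co)
    (hrep : pvRep co.keys labF (pvF co M))
    (hnd : co.keys.Nodup)
    (hfix : ∀ p, co.contains p = true → pvStepF co (pvF co M) p = pvF co M p)
    (i j : Int) (hinb : 0 ≤ i ∧ i < H ∧ 0 ≤ j ∧ j < W)
    (sA : Finset (Int × Int) × List (Int × Int × Int))
    (sB : PySem.Set (Int × Int) × List (Int × Int × Int))
    (hs1 : sA.2 = sB.2)
    (hs2 : ∀ x, x ∈ sA.1 ↔ ∃ r ∈ sB.1, labF.get? x = some r) :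
    (compStepA grid H W bc bg sA i j).2 = (pvCompStepB co labF sB i j).2 ∧
    (∀ x, x ∈ (compStepA grid H W bc bg sA i j).1 ↔
      ∃ r ∈ (pvCompStepB co labF sB i j).1, labF.get? x = some r) := by
  rcases hro : labF.get? (i, j) with _ | root
  · -- the cell is not active: both sides skip
    have hnm : (i, j) ∉ co.keys := by
      intro hm
      rw [pvRep_get?_mem hrep hnd hm] at hro
      cases hro
    have hnc : ¬ co.contains (i, j) = true :=
      fun hcon => hnm ((PySem.Dict.contains_iff_mem_keys _ _).mp hcon)
    have hcol : pvAt grid i j = bc ∨ pvAt grid i j = bg := by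
      by_contra hno
      rw [not_or] at hno
      exact hnc (((hctx (i, j)).1).mpr ⟨⟨hinb.1, hinb.2.1⟩, ⟨hinb.2.2.1, hinb.2.2.2⟩, hno.1, hno.2⟩)
    have hnv : (i, j) ∉ sA.1 := by
      intro hmem
      obtain ⟨r, _, hg⟩ := (hs2 _).mp hmem
      rw [hro] at hg
      cases hg
    unfold compStepA pvCompStepB
    rw [hro]
    rw [if_neg hnv, if_pos hcol]
    exact ⟨hs1, hs2⟩
  · have hmem : (i, j) ∈ co.keys := by
      by_contra hn
      rw [pvRep_get?_not_mem hrep hn] at hro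
      cases hro
    have hc : co.contains (i, j) = true := (PySem.Dict.contains_iff_mem_keys _ _).mpr hmem
    have hroot : root = pvF co M (i, j) := by
      rw [pvRep_get?_mem hrep hnd hmem] at hro
      cases hro
      rfl
    by_cases hseen : root ∈ sB.1
    · have hvisA : (i, j) ∈ sA.1 := (hs2 _).mpr ⟨root, hseen, hro⟩
      unfold compStepA pvCompStepB
      simp only [hro]
      rw [if_pos hvisA, if_pos ((PySem.Set.contains_iff _ _).mpr hseen)]
      exact ⟨hs1, hs2⟩
    · have hnvisA : (i, j) ∉ sA.1 := by
        intro hmemA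
        obtain ⟨r, hr, hgr⟩ := (hs2 _).mp hmemA
        rw [hro] at hgr
        cases hgr
        exact hseen hr
      have hact := ((hctx (i, j)).1).mp hc
      have hdis : ∀ y ∈ sA.1, ¬ Relation.ReflTransGen (pvRadjD co) (i, j) y := by
        intro y hy hrtg
        obtain ⟨r, hrB, hgr⟩ := (hs2 y).mp hy
        have hyK : co.contains y = true := pv_rtg_contains hc hrtg
        rw [pvRep_get?_mem hrep hnd ((PySem.Dict.contains_iff_mem_keys _ _).mp hyK)] at hgr
        cases hgr
        have : pvF co M (i, j) = pvF co M y := pvFix_const hfix hrtg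
        rw [← this, ← hroot] at hrB
        exact hseen hrB
      have hchar := floodA_comp_char hctx hc (vis := sA.1) hdis
      obtain ⟨P, hPset, hmr, hmc⟩ :=
        floodA_min grid H W (pvAt grid i j) (insert (i, j) sA.1) [(i, j)] i j
      have hPchar : ∀ z, z ∈ P.toFinset ↔ Relation.ReflTransGen (pvRadjD co) (i, j) z := by
        intro z
        rw [hPset]
        simp only [Finset.mem_union, Finset.mem_sdiff, List.toFinset_cons, List.toFinset_nil,
          insert_empty_eq, Finset.mem_singleton, Finset.mem_insert]
        constructor
        · rintro (rfl | ⟨hz1, hz2⟩)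
          · exact Relation.ReflTransGen.refl
          · rcases (hchar z).mp hz1 with hv | hr
            · exact absurd (Or.inr hv) hz2
            · exact hr
        · intro hr
          by_cases hzp : z = (i, j)
          · exact Or.inl hzp
          · refine Or.inr ⟨(hchar z).mpr (Or.inr hr), ?_⟩
            rintro (hc1 | hc1)
            · exact hzp hc1
            · exact hdis z hc1 hr
      have hcells : (labF.items.filter (fun pv => decide (pv.2 = root))).map (fun pv => pv.1)
          = co.keys.filter (fun q => decide (pvF co M q = root)) := by
        rw [hrep, List.filter_map, List.map_map]
        simp [Function.comp_def]
      have hcellchar : ∀ q, q ∈ co.keys.filter (fun q => decide (pvF co M q = root)) ↔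
          Relation.ReflTransGen (pvRadjD co) (i, j) q := by
        intro q
        rw [List.mem_filter]
        simp only [decide_eq_true_eq]
        constructor
        · rintro ⟨hqK, hqF⟩
          refine (pvFix_label_eq_iff hfix hc ((PySem.Dict.contains_iff_mem_keys _ _).mpr hqK)).mp ?_
          rw [hqF, hroot]
        · intro hr
          have hqc : co.contains q = true := pv_rtg_contains hc hr
          refine ⟨(PySem.Dict.contains_iff_mem_keys _ _).mp hqc, ?_⟩
          rw [hroot]
          exact ((pvFix_label_eq_iff hfix hc hqc).mpr hr)
      have hpcell : (i, j) ∈ co.keys.filter (fun q => decide (pvF co M q = root)) :=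
        (hcellchar _).mpr Relation.ReflTransGen.refl
      have hcne : co.keys.filter (fun q => decide (pvF co M q = root)) ≠ [] :=
        List.ne_nil_of_mem hpcell
      have hsetfst : ((co.keys.filter (fun q => decide (pvF co M q = root))).map
          (fun p => p.1)).toFinset = (i :: P.map Prod.fst).toFinset := by
        ext z
        simp only [List.mem_toFinset, List.mem_map, List.mem_cons]
        constructor
        · rintro ⟨q, hq, rfl⟩
          by_cases hqp : q = (i, j)
          · subst hqp; exact Or.inl rfl
          · exact Or.inr ⟨q, List.mem_toFinset.mp ((hPchar q).mpr ((hcellchar q).mp hq)), rfl⟩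
        · rintro (hz | ⟨x, hx, hxz⟩)
          · exact ⟨(i, j), hpcell, hz.symm⟩
          · exact ⟨x, (hcellchar x).mpr ((hPchar x).mp (List.mem_toFinset.mpr hx)), hxz⟩
      have hsetsnd : ((co.keys.filter (fun q => decide (pvF co M q = root))).map
          (fun p => p.2)).toFinset = (j :: P.map Prod.snd).toFinset := by
        ext z
        simp only [List.mem_toFinset, List.mem_map, List.mem_cons]
        constructor
        · rintro ⟨q, hq, rfl⟩
          by_cases hqp : q = (i, j)
          · subst hqp; exact Or.inl rfl
          · exact Or.inr ⟨q, List.mem_toFinset.mp ((hPchar q).mpr ((hcellchar q).mp hq)), rfl⟩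
        · rintro (hz | ⟨x, hx, hxz⟩)
          · exact ⟨(i, j), hpcell, hz.symm⟩
          · exact ⟨x, (hcellchar x).mpr ((hPchar x).mp (List.mem_toFinset.mpr hx)), hxz⟩
      have hmrB := pvMinD_eq ((co.keys.filter (fun q => decide (pvF co M q = root))).map (fun p => p.1))
        i (P.map Prod.fst) hsetfst (by
          intro hnil
          rw [List.map_eq_nil_iff] at hnil
          exact hcne hnil)
      have hmcB := pvMinD_eq ((co.keys.filter (fun q => decide (pvF co M q = root))).map (fun p => p.2))
        j (P.map Prod.snd) hsetsnd (by
          intro hnil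
          rw [List.map_eq_nil_iff] at hnil
          exact hcne hnil)
      have hcolD : co.getD (i, j) 0 = pvAt grid i j := (hctx (i, j)).2 hc
      have hcolno : ¬ (pvAt grid i j = bc ∨ pvAt grid i j = bg) := by
        rintro (hx | hx)
        · exact hact.2.2.1 hx
        · exact hact.2.2.2 hx
      unfold compStepA pvCompStepB
      simp only [hro]
      rw [if_neg hnvisA,
        if_neg (fun hcon => hseen ((PySem.Set.contains_iff _ _).mp hcon)), if_neg hcolno]
      constructor
      · show sA.2 ++ [_] = sB.2 ++ [_]
        rw [hs1]
        refine congrArg (fun t => sB.2 ++ [t]) ?_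
        rw [hcells]
        refine congrArg₂ (fun u v => (u, v, _)) ?_ ?_ |>.trans (by rw [hcolD])
        · rw [hmr, hmrB]
        · rw [hmc, hmcB]
      · intro x
        show x ∈ (floodA grid H W (pvAt grid i j) (insert (i, j) sA.1) [(i, j)] i j).1 ↔
          ∃ r ∈ PySem.Set.add sB.1 root, labF.get? x = some r
        rw [hchar x]
        constructor
        · rintro (hv | hr)
          · obtain ⟨r, hrB, hgr⟩ := (hs2 x).mp hv
            exact ⟨r, (PySem.Set.mem_add _ _ _).mpr (Or.inl hrB), hgr⟩
          · have hxc : co.contains x = true := pv_rtg_contains hc hr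
            refine ⟨root, (PySem.Set.mem_add _ _ _).mpr (Or.inr rfl), ?_⟩
            rw [pvRep_get?_mem hrep hnd ((PySem.Dict.contains_iff_mem_keys _ _).mp hxc)]
            refine congrArg some ?_
            rw [hroot]
            exact ((pvFix_label_eq_iff hfix hc hxc).mpr hr).symm ▸ rfl
        · rintro ⟨r, hrAdd, hgr⟩
          rcases (PySem.Set.mem_add _ _ _).mp hrAdd with hrB | hre
          · exact Or.inl ((hs2 x).mpr ⟨r, hrB, hgr⟩)
          · rw [hre] at hgr
            have hxK : x ∈ co.keys := by
              by_contra hn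
              rw [pvRep_get?_not_mem hrep hn] at hgr
              cases hgr
            have hxc : co.contains x = true := (PySem.Dict.contains_iff_mem_keys _ _).mpr hxK
            rw [pvRep_get?_mem hrep hnd hxK] at hgr
            have hFx : pvF co M x = root := Option.some_injective _ hgr
            refine Or.inr ((pvFix_label_eq_iff hfix hc hxc).mp ?_)
            rw [hFx, hroot]



theorem pyRange_one_nil {a b : Int} (hab : b ≤ a) : PySem.List.pyRange a b 1 = [] := by
  rw [List.eq_nil_iff_forall_not_mem]
  intro x hx
  rw [PySem.List.mem_pyRange_one] at hx
  omega

def pvPairs (H W : Int) : List (Int × Int) :=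
  (PySem.List.pyRange 1 (H - 1) 1).flatMap (fun i =>
    (PySem.List.pyRange 1 (W - 1) 1).map (fun j => (i, j)))

theorem mem_pvPairs {H W : Int} {pr : Int × Int} (h : pr ∈ pvPairs H W) :
    1 ≤ pr.1 ∧ pr.1 < H - 1 ∧ 1 ≤ pr.2 ∧ pr.2 < W - 1 := by
  unfold pvPairs at h
  rw [List.mem_flatMap] at h
  obtain ⟨i, hi, hmem⟩ := h
  rw [List.mem_map] at hmem
  obtain ⟨j, hj, rfl⟩ := hmem
  rw [PySem.List.mem_pyRange_one] at hi hj
  exact ⟨hi.1, hi.2, hj.1, hj.2⟩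

theorem pvScanA_flat (grid : List (List Int)) (H W bc bg : Int) :
    pvScanA grid H W bc bg =
      (pvPairs H W).foldl (fun s pr => compStepA grid H W bc bg s pr.1 pr.2) (∅, []) := by
  unfold pvScanA pvPairs
  have hcong : (PySem.List.pyRange 1 (H - 1) 1).foldl (fun s i =>
      (PySem.List.pyRange 1 (W - 1) 1).foldl (fun s j => compStepA grid H W bc bg s i j) s)
      (∅, []) =
      (PySem.List.pyRange 1 (H - 1) 1).foldl (fun s i =>
      ((PySem.List.pyRange 1 (W - 1) 1).map (fun j => (i, j))).foldl
        (fun s pr => compStepA grid H W bc bg s pr.1 pr.2) s)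
      (∅, []) := by
    refine congrFun (congrFun (congrArg _ ?_) _) _
    funext s i
    rw [List.foldl_map]
  rw [hcong, foldl_nested_flatMap]

theorem pvScanB_flat (co : PySem.Dict (Int × Int) Int) (labF : PySem.Dict (Int × Int) (Int × Int))
    (H W : Int) :
    pvScanB co labF H W =
      (pvPairs H W).foldl (fun s pr => pvCompStepB co labF s pr.1 pr.2)
        (PySem.Set.empty, []) := by
  unfold pvScanB pvPairs
  have hcong : (PySem.List.pyRange 1 (H - 1) 1).foldl (fun s i =>
      (PySem.List.pyRange 1 (W - 1) 1).foldl (fun s j => pvCompStepB co labF s i j) s)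
      (PySem.Set.empty, []) =
      (PySem.List.pyRange 1 (H - 1) 1).foldl (fun s i =>
      ((PySem.List.pyRange 1 (W - 1) 1).map (fun j => (i, j))).foldl
        (fun s pr => pvCompStepB co labF s pr.1 pr.2) s)
      (PySem.Set.empty, []) := by
    refine congrFun (congrFun (congrArg _ ?_) _) _
    funext s i
    rw [List.foldl_map]
  rw [hcong, foldl_nested_flatMap]

theorem pv_scan_couple {grid : List (List Int)} {H W bc bg : Int}
    {co : PySem.Dict (Int × Int) Int} {labF : PySem.Dict (Int × Int) (Int × Int)} {M : Nat}
    (hctx : pvCtx grid H W bc bg co)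
    (hrep : pvRep co.keys labF (pvF co M))
    (hnd : co.keys.Nodup)
    (hfix : ∀ p, co.contains p = true → pvStepF co (pvF co M) p = pvF co M p)
    (pairs : List (Int × Int))
    (hpairs : ∀ pr ∈ pairs, 0 ≤ pr.1 ∧ pr.1 < H ∧ 0 ≤ pr.2 ∧ pr.2 < W) :
    ∀ (sA : Finset (Int × Int) × List (Int × Int × Int))
      (sB : PySem.Set (Int × Int) × List (Int × Int × Int)),
    sA.2 = sB.2 → (∀ x, x ∈ sA.1 ↔ ∃ r ∈ sB.1, labF.get? x = some r) →
    (pairs.foldl (fun s pr => compStepA grid H W bc bg s pr.1 pr.2) sA).2 =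
    (pairs.foldl (fun s pr => pvCompStepB co labF s pr.1 pr.2) sB).2 := by
  induction pairs with
  | nil => intro sA sB hs1 _; exact hs1
  | cons pr rest ih =>
    intro sA sB hs1 hs2
    obtain ⟨h1, h2⟩ := pv_step_couple hctx hrep hnd hfix pr.1 pr.2
      (hpairs pr List.mem_cons_self) sA sB hs1 hs2
    simp only [List.foldl_cons]
    exact ih (fun q hq => hpairs q (List.mem_cons_of_mem _ hq)) _ _ h1 h2

theorem pv_scans_trivial (grid : List (List Int)) (H W bc bg : Int)
    (co : PySem.Dict (Int × Int) Int) (labF : PySem.Dict (Int × Int) (Int × Int))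
    (hdeg : H - 1 ≤ 1 ∨ W - 1 ≤ 1) :
    (pvScanA grid H W bc bg).2 = [] ∧ (pvScanB co labF H W).2 = [] := by
  unfold pvScanA pvScanB
  rcases hdeg with hdeg | hdeg
  · rw [pyRange_one_nil hdeg]
    exact ⟨rfl, rfl⟩
  · rw [pyRange_one_nil hdeg]
    constructor
    · show ((PySem.List.pyRange 1 (H - 1) 1).foldl (fun s _ => s) (∅, [])).2 = _
      rw [List.foldl_fixed]
    · show ((PySem.List.pyRange 1 (H - 1) 1).foldl (fun s _ => s) (PySem.Set.empty, [])).2 = _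
      rw [List.foldl_fixed]


theorem pvColourOf_keys_nodup (grid : List (List Int)) (h w bc bg : Int) :
    (pvColourOf grid h w bc bg).keys.Nodup := by
  show ((pvColourOf grid h w bc bg).items.map (·.1)).Nodup
  rw [pvColourOf_items]
  exact ((pvCellsAll_keys_nodup grid h w).sublist (List.Sublist.map _ List.filter_sublist))

-- with a real interior (so the grid is rectangular enough), the two scans agree
theorem pv_scan_eq (grid : List (List Int)) (bc bg : Int)
    (hrow : ∀ row ∈ grid, (PySem.List.pyGetD grid 0 []).length ≤ row.length) :
    (pvScanA grid (grid.length : Int) ((PySem.List.pyGetD grid 0 []).length : Int) bc bg).2 =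
    (pvScanB (pvColourOf grid (grid.length : Int) ((PySem.List.pyGetD grid 0 []).length : Int) bc bg)
      (((PySem.List.pyRange 0
            (((pvColourOf grid (grid.length : Int) ((PySem.List.pyGetD grid 0 []).length : Int) bc bg).keys.foldl
                (fun d p => d.insert p p) PySem.Dict.empty).size) 1).foldl (fun s _ =>
          if s.2 then s else
            let nw := pvRound (pvColourOf grid (grid.length : Int) ((PySem.List.pyGetD grid 0 []).length : Int) bc bg) s.1
            if nw = s.1 then (s.1, true) else (nw, false))
          ((pvColourOf grid (grid.length : Int) ((PySem.List.pyGetD grid 0 []).length : Int) bc bg).keys.foldl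
              (fun d p => d.insert p p) PySem.Dict.empty, false)).1)
      (grid.length : Int) ((PySem.List.pyGetD grid 0 []).length : Int)).2 := by
  set H : Int := (grid.length : Int) with hH
  set W : Int := ((PySem.List.pyGetD grid 0 []).length : Int) with hW
  set co := pvColourOf grid H W bc bg with hco
  set lab0 := co.keys.foldl (fun d p => d.insert p p) PySem.Dict.empty with hlab0def
  have hnd : co.keys.Nodup := pvColourOf_keys_nodup grid H W bc bg
  have hchar := pvColourOf_get? grid bc bg hrow
  have hctx : pvCtx grid H W bc bg co := by
    intro v
    constructor
    · rw [PySem.Dict.contains_eq_isSome_get?, hco, hchar v]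
      split
      · next hcond =>
        exact iff_of_true rfl ⟨⟨hcond.1, hcond.2.1⟩, ⟨hcond.2.2.1, hcond.2.2.2.1⟩,
          hcond.2.2.2.2.1, hcond.2.2.2.2.2⟩
      · next hcond =>
        refine iff_of_false (by simp) ?_
        intro hg
        exact hcond ⟨hg.1.1, hg.1.2, hg.2.1.1, hg.2.1.2, hg.2.2.1, hg.2.2.2⟩
    · intro hcv
      rw [PySem.Dict.getD_eq_get?_getD, hco, hchar v]
      rw [PySem.Dict.contains_eq_isSome_get?, hco, hchar v] at hcv
      split
      · rfl
      · next hcond =>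
        rw [if_neg hcond] at hcv
        cases hcv
  have hlab0 : pvRep co.keys lab0 (pvF co 0) := by
    show lab0.items = _
    rw [hlab0def]
    have := PySem.Dict.items_foldl_insert_fresh co.keys (fun p => p) (fun p => p)
      PySem.Dict.empty (fun a _ => PySem.Dict.contains_empty a) (by simpa using hnd)
    rw [this, show (PySem.Dict.empty : PySem.Dict (Int × Int) (Int × Int)).items = [] from rfl,
      List.nil_append]
    rfl
  have hsz : (PySem.List.pyRange 0 (lab0.size) 1).length = co.keys.length := by
    have h1 : lab0.size = co.keys.length := by
      show lab0.items.length = _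
      rw [hlab0 ]
      exact List.length_map _
    rw [h1, PySem.List.length_pyRange_one]
    omega
  obtain ⟨M, hrep, hfix⟩ := pvIter co hnd lab0 hlab0 hsz
  rw [pvScanA_flat, pvScanB_flat]
  refine pv_scan_couple hctx hrep hnd hfix (pvPairs H W) ?_ _ _ rfl ?_
  · intro pr hpr
    have := mem_pvPairs hpr
    omega
  · intro x
    constructor
    · intro hx
      exact absurd hx (by simp)
    · rintro ⟨r, hr, _⟩
      exact absurd hr (List.not_mem_nil)


theorem pv_main (grid : List (List Int)) (hpre : Pre_transform grid) :
    (pvScanA grid grid.length (PySem.List.pyGetD grid 0 []).length (pvAt grid 0 0)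
        (pvBg grid grid.length (PySem.List.pyGetD grid 0 []).length (pvAt grid 0 0))).2 =
    (pvScanB
        (pvColourOf grid grid.length (PySem.List.pyGetD grid 0 []).length (pvAt grid 0 0)
          (pvBg grid grid.length (PySem.List.pyGetD grid 0 []).length (pvAt grid 0 0)))
        (((PySem.List.pyRange 0
              ((pvColourOf grid grid.length (PySem.List.pyGetD grid 0 []).length (pvAt grid 0 0)
                  (pvBg grid grid.length (PySem.List.pyGetD grid 0 []).length (pvAt grid 0 0))).keys.foldl
                  (fun d p => d.insert p p) PySem.Dict.empty).size 1).foldl (fun s _ =>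
            if s.2 then s else
              let nw := pvRound (pvColourOf grid grid.length (PySem.List.pyGetD grid 0 []).length (pvAt grid 0 0)
                  (pvBg grid grid.length (PySem.List.pyGetD grid 0 []).length (pvAt grid 0 0))) s.1
              if nw = s.1 then (s.1, true) else (nw, false))
            ((pvColourOf grid grid.length (PySem.List.pyGetD grid 0 []).length (pvAt grid 0 0)
                (pvBg grid grid.length (PySem.List.pyGetD grid 0 []).length (pvAt grid 0 0))).keys.foldl
                (fun d p => d.insert p p) PySem.Dict.empty, false)).1)
        grid.length (PySem.List.pyGetD grid 0 []).length).2 := by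
  obtain ⟨hg, hg0, hdisj⟩ := hpre
  have hhead : PySem.List.pyGetD grid 0 [] = grid.headD [] := by
    cases grid with
    | nil => exact absurd rfl hg
    | cons a l => rw [PySem.List.pyGetD_zero_cons]; rfl
  by_cases hdeg : ((grid.length : Int) - 1 ≤ 1 ∨
      (((PySem.List.pyGetD grid 0 []).length : Int)) - 1 ≤ 1)
  · exact Eq.trans
      ((pv_scans_trivial grid _ _ _ _ PySem.Dict.empty PySem.Dict.empty hdeg).1)
      (Eq.symm ((pv_scans_trivial grid _ _ 0 0 _ _ hdeg).2))
  · obtain ⟨hA, hB⟩ := not_or.mp hdeg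
    have hrow : ∀ row ∈ grid, (PySem.List.pyGetD grid 0 []).length ≤ row.length := by
      rcases hdisj with hcase | hcase | hcase
      · exact absurd (by exact_mod_cast (by omega : ((grid.length : Int)) - 1 ≤ 1)) hA
      · rw [← hhead] at hcase
        exact absurd (by omega : ((PySem.List.pyGetD grid 0 []).length : Int) - 1 ≤ 1) hB
      · intro row hr
        rw [hhead]
        exact hcase row hr
    exact pv_scan_eq grid _ _ hrow
-- ===== VERDICT (by name: the statement is the Claim_ definition above) =====
theorem transform_spec : Claim_equal_transform := by
  intro grid _ hpre
  unfold Spec_transform transform transform_alt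
  exact congrArg (fun l => pvAssemble l (pvAt grid 0 0)) (pv_main grid hpre)
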